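-- pv_equiv track=rewrite | github.com/rjsdn0124/CodingTestGongBu | Baekjun/pccpgichlu/sichu.py | solution
-- ===== SOURCE A (Python) =====
-- from collections import deque
--
-- def solution(land):
--     n = len(land)
--     m = len(land[0])
--     answer = [0 for _ in range(m)]
--     visited = [[0 for _ in range(m)] for _ in range(n)]
--
--     dx = [1,0,-1,0]
--     dy = [0,1,0,-1]
--
--     # DFS
-- #     def dfs(x,y,rows):
-- #         res = 1
-- #         for k in range(4):
-- #             nx = x + dx[k]
-- #             ny = y + dy[k]
-- #             if 0 <= nx < m and 0 <= ny < n and visited[ny][nx] == 0: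
-- #                 visited[ny][nx] = 1
-- #                 if land[ny][nx] == 1:
-- #                     rows[nx] = nx
-- #                     res += dfs(nx,ny,rows)
-- #         return res
--
-- #     for i in range(n):
-- #         for j in range(m):
-- #             if visited[i][j] == 0:
-- #                 visited[i][j] = 1
-- #                 if land[i][j] == 1:
-- #                     rows = {}
-- #                     rows[j] = j
-- #                     oilnum = dfs(j,i,rows)
-- #                     for v in rows:
-- #                         answer[v] += oilnum
--
--
--     # BFS
--     for i in range(n):
--         for j in range(m):
--             if visited[i][j] == 0:
--                 visited[i][j] = 1
--                 if land[i][j] == 1: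
--                     rows = {}
--                     oilnum = 0
--                     q = deque()
--                     q.append([i,j])
--                     while q:
--                         y,x = q.popleft()
--                         rows[x] = x
--                         oilnum += 1
--                         for k in range(4):
--                             nx = x + dx[k]
--                             ny = y + dy[k]
--                             if 0 <= nx < m and 0 <= ny < n and visited[ny][nx] == 0:
--                                 visited[ny][nx] = 1
--                                 if land[ny][nx] == 1:
--                                     q.append([ny,nx])
--
--                     for v in rows:
--                         answer[v] += oilnum
--     return max(answer)
-- ===== SOURCE B (Python) =====
-- def solution(land):
--     n = len(land)
--     m = len(land[0])
--     parent = list(range(n * m))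
--
--     def find(a):
--         while parent[a] != a:
--             a = parent[a]
--         return a
--
--     def union(a, b):
--         ra = find(a)
--         rb = find(b)
--         if ra != rb:
--             if ra < rb:
--                 parent[rb] = ra
--             else:
--                 parent[ra] = rb
--
--     for i in range(n):
--         for j in range(m):
--             if land[i][j] == 1:
--                 if j + 1 < m and land[i][j + 1] == 1:
--                     union(i * m + j, i * m + j + 1)
--                 if i + 1 < n and land[i + 1][j] == 1:
--                     union(i * m + j, (i + 1) * m + j)
--
--     rootvals = []
--     colroots = [set() for _ in range(m)]
--     for i in range(n):
--         for j in range(m):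
--             if land[i][j] == 1:
--                 r = find(i * m + j)
--                 rootvals.append(r)
--                 colroots[j].add(r)
--
--     return max(sum(1 for r in rootvals if r in colroots[c]) for c in range(m))
-- ===== Notes on version B (the rewrite author's own statement) =====
-- stated objective: alternative
-- what changed: A's per-component BFS flood fill (deque, full n*m visited matrix, per-component dict of columns, in-place answer updates) is replaced by a union-find (disjoint-set) over cell indices i*m+j: one pass unions each oil cell with its right and down oil neighbours, a second pass collects each oil cell's root and the set of roots touching each column, and the answer for a column counts the oil cells whose root touches it; the proof shows root-equality coincides with 4-directional connectivity.
import Mathlib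
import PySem

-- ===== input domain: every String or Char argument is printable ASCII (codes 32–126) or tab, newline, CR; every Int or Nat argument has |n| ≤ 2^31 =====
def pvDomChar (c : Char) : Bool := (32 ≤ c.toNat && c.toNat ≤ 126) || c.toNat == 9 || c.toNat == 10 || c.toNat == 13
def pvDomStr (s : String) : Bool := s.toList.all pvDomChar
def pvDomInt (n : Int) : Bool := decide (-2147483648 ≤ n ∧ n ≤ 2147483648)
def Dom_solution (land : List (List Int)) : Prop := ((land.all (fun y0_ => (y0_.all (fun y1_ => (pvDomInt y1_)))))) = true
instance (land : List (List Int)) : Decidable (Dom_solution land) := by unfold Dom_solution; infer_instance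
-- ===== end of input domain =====

-- B replaces A's per-component BFS flood fill (deque + full n×m visited matrix + per-component
-- dict of columns) by a union-find over cell indices i*m+j: one pass unions right/down oil
-- neighbours, a second pass groups cells by root and collects the roots touching each column,
-- and each column's answer counts the oil cells whose root touches it; same return value.

-- ===== PORT A =====
-- shared 2D read helper: exact for the nonnegative in-bounds indices both Pythons use
-- (every read in either program is guarded by 0 ≤ index < dimension, and Pre_ keeps rows long enough)
def mget (g : List (List Int)) (i j d : Int) : Int :=
  if 0 ≤ i ∧ 0 ≤ j then (g.getD i.toNat []).getD j.toNat d else d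

-- visited[i][j] = v (A only assigns with nonnegative in-bounds indices)
def mset (g : List (List Int)) (i j v : Int) : List (List Int) :=
  if 0 ≤ i ∧ 0 ≤ j then g.set i.toNat ((g.getD i.toNat []).set j.toNat v) else g

-- answer[c] += x (c is always a column index 0 ≤ c < m here)
def aupd (ans : List Int) (c x : Int) : List Int :=
  PySem.List.pySetD ans c (PySem.List.pyGetD ans c 0 + x)

def dxA : List Int := [1, 0, -1, 0]
def dyA : List Int := [0, 1, 0, -1]

-- termination measure for A's while loop: number of 0 entries of the visited matrix
def vzeros (g : List (List Int)) : Nat := (g.map (fun r => r.count 0)).sum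

theorem count_set_one_lt (l : List Int) : ∀ (j : Nat), (hj : j < l.length) → l[j] = 0 →
    (l.set j 1).count 0 < l.count 0 := by
  induction l with
  | nil => intro j hj; simp at hj
  | cons a t ih =>
    intro j hj h0
    cases j with
    | zero =>
      simp only [List.getElem_cons_zero] at h0
      subst h0
      simp [List.count_cons]
    | succ k =>
      have hk : k < t.length := by simpa using hj
      have := ih k hk (by simpa using h0)
      simp only [List.set_cons_succ, List.count_cons]
      omega

theorem vzeros_set_lt (g : List (List Int)) : ∀ (i : Nat), (hi : i < g.length) → ∀ (r : List Int),
    r.count 0 < g[i].count 0 → vzeros (g.set i r) < vzeros g := by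
  induction g with
  | nil => intro i hi; simp at hi
  | cons a t ih =>
    intro i hi r hr
    cases i with
    | zero => simp only [List.getElem_cons_zero] at hr; simp [vzeros]; omega
    | succ k =>
      have hk : k < t.length := by simpa using hi
      have := ih k hk r (by simpa using hr)
      simp only [List.set_cons_succ]
      simp only [vzeros, List.map_cons, List.sum_cons] at this ⊢
      omega

theorem vzeros_mset_lt (g : List (List Int)) (i j : Int)
    (h : mget g i j 1 = 0) : vzeros (mset g i j 1) < vzeros g := by
  unfold mget at h
  unfold mset
  by_cases hij : 0 ≤ i ∧ 0 ≤ j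
  · rw [if_pos hij] at h ⊢
    by_cases hi : i.toNat < g.length
    · rw [List.getD_eq_getElem g [] hi] at h ⊢
      by_cases hj : j.toNat < (g[i.toNat]).length
      · rw [List.getD_eq_getElem _ 1 hj] at h
        exact vzeros_set_lt g i.toNat hi _ (count_set_one_lt _ j.toNat hj h)
      · rw [List.getD_eq_default _ _ (by omega)] at h; omega
    · rw [List.getD_eq_default g [] (by omega)] at h
      simp at h
  · rw [if_neg hij] at h; omega

-- one neighbour direction k of A's inner 'for k in range(4)' (the loop body, unrolled below)
def stepA (land : List (List Int)) (n m y x : Int) (k : Nat)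
    (st : List (List Int) × List (Int × Int)) : List (List Int) × List (Int × Int) :=
  let nx := x + dxA.getD k 0
  let ny := y + dyA.getD k 0
  if 0 ≤ nx ∧ nx < m ∧ 0 ≤ ny ∧ ny < n ∧ mget st.1 ny nx 1 = 0 then
    let v := mset st.1 ny nx 1
    if mget land ny nx 0 = 1 then (v, st.2 ++ [(ny, nx)]) else (v, st.2)
  else st

theorem stepA_measure (land : List (List Int)) (n m y x : Int) (k : Nat)
    (st : List (List Int) × List (Int × Int)) :
    2 * vzeros (stepA land n m y x k st).1 + (stepA land n m y x k st).2.length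
      ≤ 2 * vzeros st.1 + st.2.length := by
  unfold stepA
  dsimp only
  split
  · next hg =>
    have hlt := vzeros_mset_lt st.1 (y + dyA.getD k 0) (x + dxA.getD k 0) hg.2.2.2.2
    split <;> simp only [List.length_append, List.length_cons, List.length_nil] <;> omega
  · exact le_refl _

-- A's BFS while loop ('for k in range(4)' unrolled into the four stepA applications)
def bfsA (land : List (List Int)) (n m : Int) (v : List (List Int)) (q : List (Int × Int))
    (rows : PySem.Dict Int Int) (oil : Int) :
    List (List Int) × PySem.Dict Int Int × Int :=
  match q with
  | [] => (v, rows, oil)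
  | (y, x) :: rest =>
    let rows' := rows.insert x x
    let oil' := oil + 1
    let st := stepA land n m y x 3 (stepA land n m y x 2 (stepA land n m y x 1
      (stepA land n m y x 0 (v, rest))))
    bfsA land n m st.1 st.2 rows' oil'
termination_by 2 * vzeros v + q.length
decreasing_by
  have h0 := stepA_measure land n m y x 0 (v, rest)
  have h1 := stepA_measure land n m y x 1 (stepA land n m y x 0 (v, rest))
  have h2 := stepA_measure land n m y x 2 (stepA land n m y x 1 (stepA land n m y x 0 (v, rest)))
  have h3 := stepA_measure land n m y x 3 (stepA land n m y x 2 (stepA land n m y x 1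
    (stepA land n m y x 0 (v, rest))))
  simp only [List.length_cons] at *
  omega

def solution (land : List (List Int)) : Int :=
  let n : Int := PySem.List.len land
  let m : Int := PySem.List.len (PySem.List.pyGetD land 0 [])
  let answer0 : List Int := (PySem.List.pyRange 0 m 1).map (fun _ => (0 : Int))
  let visited0 : List (List Int) :=
    (PySem.List.pyRange 0 n 1).map (fun _ => (PySem.List.pyRange 0 m 1).map (fun _ => (0 : Int)))
  let fin := (PySem.List.pyRange 0 n 1).foldl (fun st i =>
    (PySem.List.pyRange 0 m 1).foldl (fun (st : List Int × List (List Int)) j =>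
      if mget st.2 i j 1 = 0 then
        let v1 := mset st.2 i j 1
        if mget land i j 0 = 1 then
          let r := bfsA land n m v1 [(i, j)] (PySem.Dict.empty) 0
          ((r.2.1.keys).foldl (fun a c => aupd a c r.2.2) st.1, r.1)
        else (st.1, v1)
      else st) st) (answer0, visited0)
  (PySem.List.max? fin.1 (fun z => z)).getD 0

-- ===== PORT B =====
-- find(a): 'while parent[a] != a: a = parent[a]'.  The fuel argument (called with fuel =
-- len(parent)) only makes the loop total; under the invariant parent[a] ≤ a that the
-- program maintains, fuel len(parent) is always enough, so this computes what Python computes.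
def ufFind (p : List Int) : Nat → Int → Int
  | 0, a => a
  | f + 1, a =>
    let pa := PySem.List.pyGetD p a a   -- parent[a]; every call is with 0 ≤ a < len(parent)
    if pa = a then a else ufFind p f pa

-- union(a, b): link the larger root under the smaller
def ufUnion (p : List Int) (a b : Int) : List Int :=
  let ra := ufFind p p.length a
  let rb := ufFind p p.length b
  if ra ≠ rb then
    (if ra < rb then PySem.List.pySetD p rb ra else PySem.List.pySetD p ra rb)
  else p

def solution_alt (land : List (List Int)) : Int :=
  let n : Int := PySem.List.len land
  let m : Int := PySem.List.len (PySem.List.pyGetD land 0 [])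
  let parent0 : List Int := PySem.List.pyRange 0 (n * m) 1
  -- first pass: union each oil cell with its right and down oil neighbours
  let p1 := (PySem.List.pyRange 0 n 1).foldl (fun p i =>
    (PySem.List.pyRange 0 m 1).foldl (fun (p : List Int) j =>
      if mget land i j 0 = 1 then
        let p' := if j + 1 < m ∧ mget land i (j + 1) 0 = 1
          then ufUnion p (i * m + j) (i * m + j + 1) else p
        if i + 1 < n ∧ mget land (i + 1) j 0 = 1
          then ufUnion p' (i * m + j) ((i + 1) * m + j) else p'
      else p) p) parent0
  -- second pass: each oil cell's root, and the set of roots touching each column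
  let colroots0 : List (PySem.Set Int) :=
    (PySem.List.pyRange 0 m 1).map (fun _ => (PySem.Set.empty : PySem.Set Int))
  let fin := (PySem.List.pyRange 0 n 1).foldl (fun st i =>
    (PySem.List.pyRange 0 m 1).foldl (fun (st : List Int × List (PySem.Set Int)) j =>
      if mget land i j 0 = 1 then
        let r := ufFind p1 p1.length (i * m + j)
        (st.1 ++ [r],
         PySem.List.pySetD st.2 j (PySem.Set.add (PySem.List.pyGetD st.2 j PySem.Set.empty) r))
      else st) st) (([] : List Int), colroots0)
  -- answer[c] = number of oil cells whose component touches column c; return the max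
  let ans := (PySem.List.pyRange 0 m 1).map (fun c =>
    ((fin.1.map (fun r =>
      if PySem.Set.contains (PySem.List.pyGetD fin.2 c PySem.Set.empty) r then (1 : Int) else 0)).sum))
  (PySem.List.max? ans (fun z => z)).getD 0

-- ===== PRECONDITION & SPEC =====
-- Pre_ excludes exactly the inputs on which A raises: empty land (IndexError on land[0]),
-- an empty first row (ValueError: max of the empty answer list), and a row shorter than
-- len(land[0]) (IndexError when that row is scanned). On every other input A returns normally.
def Pre_solution (land : List (List Int)) : Prop :=
  land ≠ [] ∧ 0 < land.headI.length ∧ ∀ row ∈ land, land.headI.length ≤ row.length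
instance (land : List (List Int)) : Decidable (Pre_solution land) := by
  unfold Pre_solution; infer_instance

def pvWitness_solution : List (List Int) := [[1, 0, 1], [1, 0, 0]]

def Spec_solution (land : List (List Int)) (out : Int) : Prop := out = solution_alt land
instance (land : List (List Int)) (out : Int) : Decidable (Spec_solution land out) := by
  unfold Spec_solution; infer_instance

-- ===== CLAIM (what is proved, stated in full; the proofs are below) =====
def Claim_equal_solution : Prop :=
  ∀ (land : List (List Int)), Dom_solution land → Pre_solution land →
    Spec_solution land (solution land)

-- ===== LEMMAS AND PROOFS =====

-- ---------- abstract layer: oil cells, adjacency, components ----------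

def allCells (n m : Int) : List (Int × Int) :=
  (PySem.List.pyRange 0 n 1).flatMap (fun i => (PySem.List.pyRange 0 m 1).map (fun j => (i, j)))

def oneB (land : List (List Int)) (n m : Int) (c : Int × Int) : Bool :=
  decide (0 ≤ c.1 ∧ c.1 < n ∧ 0 ≤ c.2 ∧ c.2 < m ∧ mget land c.1 c.2 0 = 1)

def adjP (land : List (List Int)) (n m : Int) (c d : Int × Int) : Prop :=
  oneB land n m c = true ∧ oneB land n m d = true ∧
    (c.1 - d.1).natAbs + (c.2 - d.2).natAbs = 1

def ReachP (land : List (List Int)) (n m : Int) : Int × Int → Int × Int → Prop :=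
  Relation.ReflTransGen (adjP land n m)

def gridOnes (land : List (List Int)) (n m : Int) : Finset (Int × Int) :=
  (allCells n m).toFinset.filter (fun c => oneB land n m c = true)

noncomputable def compF (land : List (List Int)) (n m : Int) (s : Int × Int) :
    Finset (Int × Int) :=
  @Finset.filter _ (fun d => ReachP land n m s d) (Classical.decPred _) (gridOnes land n m)

theorem oneB_bounds (land : List (List Int)) (n m : Int) (c : Int × Int)
    (h : oneB land n m c = true) :
    0 ≤ c.1 ∧ c.1 < n ∧ 0 ≤ c.2 ∧ c.2 < m ∧ mget land c.1 c.2 0 = 1 := by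
  unfold oneB at h
  exact of_decide_eq_true h

theorem mem_allCells (n m : Int) (c : Int × Int) :
    c ∈ allCells n m ↔ 0 ≤ c.1 ∧ c.1 < n ∧ 0 ≤ c.2 ∧ c.2 < m := by
  unfold allCells
  simp only [List.mem_flatMap, List.mem_map, PySem.List.mem_pyRange_one]
  constructor
  · rintro ⟨i, hi, j, hj, rfl⟩; exact ⟨hi.1, hi.2, hj.1, hj.2⟩
  · rintro ⟨h1, h2, h3, h4⟩; exact ⟨c.1, ⟨h1, h2⟩, c.2, ⟨h3, h4⟩, rfl⟩

theorem mem_gridOnes (land : List (List Int)) (n m : Int) (c : Int × Int) :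
    c ∈ gridOnes land n m ↔ oneB land n m c = true := by
  unfold gridOnes
  simp only [Finset.mem_filter, List.mem_toFinset, and_iff_right_iff_imp]
  intro h
  obtain ⟨h1, h2, h3, h4, _⟩ := oneB_bounds land n m c h
  exact (mem_allCells n m c).mpr ⟨h1, h2, h3, h4⟩

theorem mem_compF (land : List (List Int)) (n m : Int) (s d : Int × Int) :
    d ∈ compF land n m s ↔ oneB land n m d = true ∧ ReachP land n m s d := by
  unfold compF
  rw [@Finset.mem_filter _ _ (Classical.decPred _), mem_gridOnes]

theorem adjP_symm (land : List (List Int)) (n m : Int) :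
    ∀ {c d : Int × Int}, adjP land n m c d → adjP land n m d c := by
  intro c d h
  refine ⟨h.2.1, h.1, ?_⟩
  have h22 := h.2.2
  omega

theorem reach_symm (land : List (List Int)) (n m : Int) {c d : Int × Int}
    (h : ReachP land n m c d) : ReachP land n m d c :=
  (Relation.ReflTransGen.symmetric (fun _ _ hh => adjP_symm land n m hh)) h

theorem reach_one (land : List (List Int)) (n m : Int) {s c : Int × Int}
    (hs : oneB land n m s = true) (h : ReachP land n m s c) : oneB land n m c = true := by
  induction h with
  | refl => exact hs
  | tail _ hadj ih => exact hadj.2.1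

theorem compF_eq_of_reach (land : List (List Int)) (n m : Int) {s c : Int × Int}
    (h : ReachP land n m s c) : compF land n m c = compF land n m s := by
  ext d
  rw [mem_compF, mem_compF]
  constructor
  · rintro ⟨h1, h2⟩; exact ⟨h1, h.trans h2⟩
  · rintro ⟨h1, h2⟩; exact ⟨h1, (reach_symm land n m h).trans h2⟩

-- the common count both programs compute: oil cells whose component touches column c
noncomputable def SpecCnt (land : List (List Int)) (n m c : Int) : Nat :=
  (@Finset.filter _ (fun e => ∃ d ∈ compF land n m e, d.2 = c) (Classical.decPred _)
    (gridOnes land n m)).card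

-- the common answer list
noncomputable def specAns (land : List (List Int)) (n m : Int) : List Int :=
  (PySem.List.pyRange 0 m 1).map (fun c => ((SpecCnt land n m c : Nat) : Int))

-- ---------- fold plumbing: nested range loops as one loop over the cells ----------

theorem foldl_flatMap {α β σ : Type} (L : List α) (f : α → List β) (g : σ → β → σ) :
    ∀ (init : σ), (L.flatMap f).foldl g init = L.foldl (fun st a => (f a).foldl g st) init := by
  induction L with
  | nil => intro init; rfl
  | cons a t ih =>
    intro init
    rw [List.flatMap_cons, List.foldl_append, List.foldl_cons, ih]

theorem nested_fold_eq_cells {σ : Type} (n m : Int) (F : σ → Int × Int → σ) (init : σ) :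
    (PySem.List.pyRange 0 n 1).foldl (fun st i =>
      (PySem.List.pyRange 0 m 1).foldl (fun st j => F st (i, j)) st) init
    = (allCells n m).foldl F init := by
  unfold allCells
  rw [foldl_flatMap]
  have : (fun (st : σ) (a : Int) => ((PySem.List.pyRange 0 m 1).map (fun j => (a, j))).foldl F st)
      = (fun (st : σ) (i : Int) => (PySem.List.pyRange 0 m 1).foldl (fun st j => F st (i, j)) st) := by
    funext st i
    rw [List.foldl_map]
  rw [this]

-- fold with a processed-prefix invariant
theorem fold_pref {α σ : Type} (f : σ → α → σ) (Q : α → Prop) (P : List α → σ → Prop)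
    (hstep : ∀ done a st, Q a → P done st → P (done ++ [a]) (f st a)) :
    ∀ (L done : List α) (st : σ), (∀ a ∈ L, Q a) → P done st → P (done ++ L) (L.foldl f st) := by
  intro L
  induction L with
  | nil => intro done st _ h; simpa using h
  | cons a t ih =>
    intro done st hQ h
    have := ih (done ++ [a]) (f st a) (fun x hx => hQ x (List.mem_cons_of_mem _ hx))
      (hstep done a st (hQ a List.mem_cons_self) h)
    simpa [List.append_assoc] using this

-- ---------- the generic worklist loop (A's BFS inner loop is an instance) ----------

def wlStep (land : List (List Int)) (n m : Int)
    (push : List (Int × Int) → Int × Int → List (Int × Int)) (c : Int × Int)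
    (st : Finset (Int × Int) × List (Int × Int)) (δ : Int × Int) :
    Finset (Int × Int) × List (Int × Int) :=
  let d := (c.1 + δ.1, c.2 + δ.2)
  if oneB land n m d = true ∧ d ∉ st.1 then (insert d st.1, push st.2 d) else st

theorem wlStep_measure (land : List (List Int)) (n m : Int) (push) (c : Int × Int)
    (hl : ∀ W e, (push W e).length = W.length + 1)
    (st : Finset (Int × Int) × List (Int × Int)) (δ : Int × Int) :
    2 * ((gridOnes land n m) \ (wlStep land n m push c st δ).1).card
        + (wlStep land n m push c st δ).2.length
      ≤ 2 * ((gridOnes land n m) \ st.1).card + st.2.length := by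
  unfold wlStep
  dsimp only
  split
  · next hg =>
    dsimp only
    have hmem : (c.1 + δ.1, c.2 + δ.2) ∈ gridOnes land n m \ st.1 :=
      Finset.mem_sdiff.mpr ⟨(mem_gridOnes land n m _).mpr hg.1, hg.2⟩
    have hsub : gridOnes land n m \ insert (c.1 + δ.1, c.2 + δ.2) st.1
        ⊆ (gridOnes land n m \ st.1).erase (c.1 + δ.1, c.2 + δ.2) := by
      intro e he
      rw [Finset.mem_sdiff, Finset.mem_insert] at he
      rw [Finset.mem_erase, Finset.mem_sdiff]
      push_neg at he
      exact ⟨he.2.1, he.1, he.2.2⟩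
    have hcard : (gridOnes land n m \ insert (c.1 + δ.1, c.2 + δ.2) st.1).card
        < (gridOnes land n m \ st.1).card := by
      calc _ ≤ ((gridOnes land n m \ st.1).erase (c.1 + δ.1, c.2 + δ.2)).card :=
              Finset.card_le_card hsub
        _ < (gridOnes land n m \ st.1).card := Finset.card_erase_lt_of_mem hmem
    rw [hl]
    omega
  · exact le_refl _

theorem wlFold_measure (land : List (List Int)) (n m : Int) (push) (c : Int × Int)
    (hl : ∀ W e, (push W e).length = W.length + 1) :
    ∀ (ds : List (Int × Int)) (st : Finset (Int × Int) × List (Int × Int)),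
    2 * ((gridOnes land n m) \ (ds.foldl (wlStep land n m push c) st).1).card
        + (ds.foldl (wlStep land n m push c) st).2.length
      ≤ 2 * ((gridOnes land n m) \ st.1).card + st.2.length := by
  intro ds
  induction ds with
  | nil => intro st; exact le_refl _
  | cons a t ih =>
    intro st
    exact le_trans (ih (wlStep land n m push c st a)) (wlStep_measure land n m push c hl st a)

def wl (land : List (List Int)) (n m : Int) (dirs : List (Int × Int))
    (push : List (Int × Int) → Int × Int → List (Int × Int))
    (hl : ∀ W e, (push W e).length = W.length + 1) :
    Finset (Int × Int) → List (Int × Int) → Int → Finset Int →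
      Finset (Int × Int) × Int × Finset Int
  | V, [], oil, cols => (V, oil, cols)
  | V, c :: W, oil, cols =>
    let st := dirs.foldl (wlStep land n m push c) (V, W)
    wl land n m dirs push hl st.1 st.2 (oil + 1) (insert c.2 cols)
termination_by V W => 2 * ((gridOnes land n m) \ V).card + W.length
decreasing_by
  have := wlFold_measure land n m push c hl dirs (V, W)
  dsimp only at this
  simp only [List.foldl_attach, List.length_cons]
  omega

def colIm (S : Finset (Int × Int)) : Finset Int := S.image Prod.snd

-- characterization of one pass of the neighbour fold
theorem wlFold_char (land : List (List Int)) (n m : Int) (push) (c : Int × Int)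
    (hp : ∀ W e, (push W e).Perm (e :: W)) :
    ∀ (ds : List (Int × Int)) (V : Finset (Int × Int)) (W : List (Int × Int)),
    ∃ N : List (Int × Int),
      N.Nodup ∧
      (∀ d ∈ N, oneB land n m d = true ∧ d ∉ V ∧ ∃ δ ∈ ds, d = (c.1 + δ.1, c.2 + δ.2)) ∧
      (ds.foldl (wlStep land n m push c) (V, W)).1 = V ∪ N.toFinset ∧
      ((ds.foldl (wlStep land n m push c) (V, W)).2).Perm (N ++ W) ∧
      (∀ δ ∈ ds, oneB land n m (c.1 + δ.1, c.2 + δ.2) = true →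
        (c.1 + δ.1, c.2 + δ.2) ∈ (ds.foldl (wlStep land n m push c) (V, W)).1) := by
  intro ds
  induction ds with
  | nil =>
    intro V W
    exact ⟨[], List.nodup_nil, by simp, by simp, List.Perm.refl _, by simp⟩
  | cons δ t ih =>
    intro V W
    simp only [List.foldl_cons]
    by_cases hg : oneB land n m (c.1 + δ.1, c.2 + δ.2) = true ∧ (c.1 + δ.1, c.2 + δ.2) ∉ V
    · have hstep : wlStep land n m push c (V, W) δ
          = (insert (c.1 + δ.1, c.2 + δ.2) V, push W (c.1 + δ.1, c.2 + δ.2)) := by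
        unfold wlStep; dsimp only; rw [if_pos hg]
      rw [hstep]
      obtain ⟨N', hnd, hprops, h1, h2, hcov⟩ :=
        ih (insert (c.1 + δ.1, c.2 + δ.2) V) (push W (c.1 + δ.1, c.2 + δ.2))
      refine ⟨(c.1 + δ.1, c.2 + δ.2) :: N', ?_, ?_, ?_, ?_, ?_⟩
      · exact List.nodup_cons.mpr
          ⟨fun hmem => (hprops _ hmem).2.1 (Finset.mem_insert_self _ _), hnd⟩
      · intro e he
        rcases List.mem_cons.mp he with rfl | he'
        · exact ⟨hg.1, hg.2, δ, List.mem_cons_self, rfl⟩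
        · obtain ⟨ho, hnv, δ', hδ', he⟩ := hprops e he'
          exact ⟨ho, fun hv => hnv (Finset.mem_insert_of_mem hv),
            δ', List.mem_cons_of_mem _ hδ', he⟩
      · rw [h1]
        ext e
        simp only [Finset.mem_union, Finset.mem_insert, List.toFinset_cons, List.mem_toFinset]
        tauto
      · refine h2.trans (((hp W (c.1 + δ.1, c.2 + δ.2)).append_left N').trans ?_)
        exact List.perm_middle
      · intro δ' hδ' hone
        rcases List.mem_cons.mp hδ' with rfl | hδt
        · rw [h1]
          exact Finset.mem_union_left _ (Finset.mem_insert_self _ _)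
        · exact hcov δ' hδt hone
    · have hstep : wlStep land n m push c (V, W) δ = (V, W) := by
        unfold wlStep; dsimp only; rw [if_neg hg]
      rw [hstep]
      obtain ⟨N, hnd, hprops, h1, h2, hcov⟩ := ih V W
      refine ⟨N, hnd, ?_, h1, h2, ?_⟩
      · intro e he
        obtain ⟨ho, hnv, δ', hδ', he⟩ := hprops e he
        exact ⟨ho, hnv, δ', List.mem_cons_of_mem _ hδ', he⟩
      · intro δ' hδ' hone
        rcases List.mem_cons.mp hδ' with rfl | hδt
        · have hv : (c.1 + δ'.1, c.2 + δ'.2) ∈ V := by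
            by_contra hnv
            exact hg ⟨hone, hnv⟩
          rw [h1]
          exact Finset.mem_union_left _ hv
        · exact hcov δ' hδt hone

-- the heart of A's proof: the worklist computes the component, whatever the pop/push order
theorem wl_spec (land : List (List Int)) (n m : Int) (dirs : List (Int × Int)) (push)
    (hl : ∀ W e, (push W e).length = W.length + 1)
    (hp : ∀ W e, (push W e).Perm (e :: W))
    (hdirs : ∀ δ ∈ dirs, (Prod.fst δ).natAbs + (Prod.snd δ).natAbs = 1)
    (hcov : ∀ δ : Int × Int, δ.1.natAbs + δ.2.natAbs = 1 → δ ∈ dirs)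
    (s : Int × Int) (hs : oneB land n m s = true) :
    ∀ (V : Finset (Int × Int)) (W : List (Int × Int)) (oil : Int) (cols : Finset Int),
    W.Nodup →
    (∀ c ∈ W, c ∈ V ∧ ReachP land n m s c) →
    (∀ c, ReachP land n m s c → c ∈ V → c ∉ W →
      ∀ d, adjP land n m c d → d ∈ V) →
    s ∈ V →
    wl land n m dirs push hl V W oil cols
      = (V ∪ compF land n m s,
         oil + W.length + (((compF land n m s) \ V).card : Int),
         cols ∪ colIm (W.toFinset ∪ (compF land n m s \ V))) := by
  intro V W oil cols
  induction V, W, oil, cols using wl.induct land n m dirs push hl with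
  | case1 V oil cols =>
    intro _ _ hclosed hsV
    have hCV : compF land n m s ⊆ V := by
      intro d hd
      rw [mem_compF] at hd
      obtain ⟨hone_d, hr⟩ := hd
      clear hone_d
      induction hr with
      | refl => exact hsV
      | tail hr hadj ihd => exact hclosed _ hr ihd List.not_mem_nil _ hadj
    rw [wl]
    have h2 : compF land n m s \ V = ∅ := Finset.sdiff_eq_empty_iff_subset.mpr hCV
    rw [Finset.union_eq_left.mpr hCV, h2]
    simp [colIm]
  | case2 V c W oil cols st0 ih =>
    intro hnd h1 hclosed hsV
    have hst0 : st0 = dirs.foldl (wlStep land n m push c) (V, W) := by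
      show (dirs.attach.foldl (fun acc t => wlStep land n m push c acc t.val) (V, W) : _) = _
      exact List.foldl_attach
    simp only [hst0] at ih
    clear hst0
    obtain ⟨N, hNnd, hNprops, hV1, hW1perm, hcovN⟩ := wlFold_char land n m push c hp dirs V W
    have hcV : c ∈ V := (h1 c List.mem_cons_self).1
    have hrc : ReachP land n m s c := (h1 c List.mem_cons_self).2
    have honec : oneB land n m c = true := reach_one land n m hs hrc
    have hNadj : ∀ d ∈ N, adjP land n m c d := by
      intro d hd
      obtain ⟨ho, hnv, δ, hδ, hde⟩ := hNprops d hd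
      refine ⟨honec, ho, ?_⟩
      have hn1 := hdirs δ hδ
      subst hde
      simp only
      omega
    have hNreach : ∀ d ∈ N, ReachP land n m s d := fun d hd => hrc.tail (hNadj d hd)
    have hNC : ∀ d ∈ N, d ∈ compF land n m s := by
      intro d hd
      rw [mem_compF]
      exact ⟨(hNprops d hd).1, hNreach d hd⟩
    have hNfresh : ∀ d ∈ N, d ∉ V := fun d hd => (hNprops d hd).2.1
    have hWsub : ∀ e ∈ W, e ∈ V := fun e he => (h1 e (List.mem_cons_of_mem _ he)).1
    set st := dirs.foldl (wlStep land n m push c) (V, W) with hst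
    have hmemst2 : ∀ e, e ∈ st.2 ↔ e ∈ N ∨ e ∈ W := by
      intro e
      rw [hW1perm.mem_iff, List.mem_append]
    -- invariants for the recursive call
    have inv1 : st.2.Nodup := by
      rw [hW1perm.nodup_iff]
      rw [List.nodup_append]
      refine ⟨hNnd, (List.nodup_cons.mp hnd).2, ?_⟩
      intro e he f hf hef
      exact hNfresh e he (hef ▸ hWsub f hf)
    have inv2 : ∀ e ∈ st.2, e ∈ st.1 ∧ ReachP land n m s e := by
      intro e he
      rcases (hmemst2 e).mp he with heN | heW
      · exact ⟨by rw [hV1]; exact Finset.mem_union_right _ (List.mem_toFinset.mpr heN),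
          hNreach e heN⟩
      · exact ⟨by rw [hV1]; exact Finset.mem_union_left _ (hWsub e heW),
          (h1 e (List.mem_cons_of_mem _ heW)).2⟩
    have inv3 : ∀ e, ReachP land n m s e → e ∈ st.1 → e ∉ st.2 →
        ∀ d, adjP land n m e d → d ∈ st.1 := by
      intro e hre heV hent d hadj
      have heV' : e ∈ V := by
        rw [hV1] at heV
        rcases Finset.mem_union.mp heV with h | h
        · exact h
        · exact absurd ((hmemst2 e).mpr (Or.inl (List.mem_toFinset.mp h))) hent
      by_cases hec : e = c
      · subst hec
        have hδ : (d.1 - e.1, d.2 - e.2) ∈ dirs := by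
          apply hcov
          have := hadj.2.2
          simp only
          omega
        have := hcovN _ hδ (by
          have hd2 : (e.1 + (d.1 - e.1), e.2 + (d.2 - e.2)) = d := by
            ext <;> simp <;> ring
          rw [hd2]
          exact hadj.2.1)
        have hd2 : (e.1 + (d.1 - e.1), e.2 + (d.2 - e.2)) = d := by
          ext <;> simp <;> ring
        rw [hd2] at this
        exact this
      · have hentc : e ∉ c :: W := by
          intro hmem
          rcases List.mem_cons.mp hmem with h | h
          · exact hec h
          · exact hent ((hmemst2 e).mpr (Or.inr h))
        have := hclosed e hre heV' hentc d hadj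
        rw [hV1]
        exact Finset.mem_union_left _ this
    have inv4 : s ∈ st.1 := by
      rw [hV1]; exact Finset.mem_union_left _ hsV
    have heq := ih inv1 inv2 inv3 inv4
    rw [wl]
    rw [← hst, heq]
    -- now the three components
    have hNsub : N.toFinset ⊆ compF land n m s := fun e he => hNC e (List.mem_toFinset.mp he)
    have hNsubCV : N.toFinset ⊆ compF land n m s \ V := by
      intro e he
      exact Finset.mem_sdiff.mpr ⟨hNsub he, hNfresh e (List.mem_toFinset.mp he)⟩
    have hcomp1 : st.1 ∪ compF land n m s = V ∪ compF land n m s := by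
      rw [hV1, Finset.union_assoc, Finset.union_eq_right.mpr hNsub]
    have hsdiff : compF land n m s \ st.1 = (compF land n m s \ V) \ N.toFinset := by
      rw [hV1]
      ext e
      simp only [Finset.mem_sdiff, Finset.mem_union]
      tauto
    have hcard : ((compF land n m s \ V) \ N.toFinset).card
        = (compF land n m s \ V).card - N.length := by
      rw [Finset.card_sdiff, Finset.inter_eq_left.mpr hNsubCV,
        List.toFinset_card_of_nodup hNnd]
    have hcardle : N.length ≤ (compF land n m s \ V).card := by
      rw [← List.toFinset_card_of_nodup hNnd]
      exact Finset.card_le_card hNsubCV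
    have hlen : st.2.length = N.length + W.length := by
      rw [hW1perm.length_eq, List.length_append]
    have hinner : st.2.toFinset ∪ (compF land n m s \ st.1)
        = W.toFinset ∪ (compF land n m s \ V) := by
      rw [List.toFinset_eq_of_perm _ _ hW1perm, List.toFinset_append, hsdiff]
      ext e
      simp only [Finset.mem_union, Finset.mem_sdiff, List.mem_toFinset]
      constructor
      · rintro ((h | h) | ⟨⟨h1', h2'⟩, h3'⟩)
        · exact Or.inr ⟨hNC e h, hNfresh e h⟩
        · exact Or.inl h
        · exact Or.inr ⟨h1', h2'⟩
      · rintro (h | h)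
        · exact Or.inl (Or.inr h)
        · by_cases heN : e ∈ N
          · exact Or.inl (Or.inl heN)
          · exact Or.inr ⟨h, heN⟩
    refine Prod.ext hcomp1 (Prod.ext ?_ ?_)
    · simp only
      rw [hsdiff, hcard, hlen, List.length_cons]
      push_cast [Nat.cast_sub hcardle]
      ring
    · simp only
      rw [hinner, List.toFinset_cons]
      simp only [colIm, Finset.insert_union, Finset.image_insert]
      ext z
      simp only [Finset.mem_union, Finset.mem_insert]
      tauto

-- ---------- bridging A's visited matrix to Finsets ----------

def ShapeM (n m : Int) (g : List (List Int)) : Prop :=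
  g.length = n.toNat ∧ ∀ r ∈ g, r.length = m.toNat

def Vpr (land : List (List Int)) (n m : Int) (v : List (List Int)) : Finset (Int × Int) :=
  (gridOnes land n m).filter (fun c => mget v c.1 c.2 1 ≠ 0)

theorem mem_Vpr (land : List (List Int)) (n m : Int) (v : List (List Int)) (c : Int × Int) :
    c ∈ Vpr land n m v ↔ oneB land n m c = true ∧ mget v c.1 c.2 1 ≠ 0 := by
  unfold Vpr
  rw [Finset.mem_filter, mem_gridOnes]

theorem getD_set_self' {α : Type} (l : List α) (k : Nat) (a d : α) (hk : k < l.length) :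
    (l.set k a).getD k d = a := by
  rw [List.getD_eq_getElem _ _ (by simpa using hk)]
  exact List.getElem_set_self _

theorem getD_set_ne' {α : Type} (l : List α) (k k' : Nat) (a d : α) (h : k' ≠ k) :
    (l.set k a).getD k' d = l.getD k' d := by
  rw [List.getD_eq_getElem?_getD, List.getElem?_set_ne (Ne.symm h), ← List.getD_eq_getElem?_getD]

theorem mget_mset_ne (g : List (List Int)) (i j i' j' x d : Int)
    (h : ¬(i' = i ∧ j' = j)) : mget (mset g i j x) i' j' d = mget g i' j' d := by
  unfold mget mset
  by_cases hij : 0 ≤ i ∧ 0 ≤ j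
  · rw [if_pos hij]
    by_cases hij' : 0 ≤ i' ∧ 0 ≤ j'
    · rw [if_pos hij', if_pos hij']
      by_cases hrow : i'.toNat = i.toNat
      · have hii : i' = i := by omega
        have hjj : j'.toNat ≠ j.toNat := by
          intro hc
          exact h ⟨hii, by omega⟩
        rw [hrow]
        by_cases hlen : i.toNat < g.length
        · rw [getD_set_self' g i.toNat _ [] hlen]
          rw [getD_set_ne' _ j.toNat j'.toNat x d hjj]
        · rw [List.set_eq_of_length_le (by omega)]
      · rw [getD_set_ne' g i.toNat i'.toNat _ [] hrow]
    · rw [if_neg hij', if_neg hij']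
  · rw [if_neg hij]

theorem mget_mset_self (g : List (List Int)) (i j x d : Int)
    (h0 : 0 ≤ i) (h1 : 0 ≤ j) (hi : i.toNat < g.length)
    (hj : j.toNat < (g.getD i.toNat []).length) :
    mget (mset g i j x) i j d = x := by
  unfold mget mset
  rw [if_pos ⟨h0, h1⟩, if_pos ⟨h0, h1⟩]
  rw [getD_set_self' g i.toNat _ [] hi]
  rw [getD_set_self' _ j.toNat x d hj]

theorem mset_shape (n m : Int) (g : List (List Int)) (i j x : Int)
    (hs : ShapeM n m g) : ShapeM n m (mset g i j x) := by
  unfold mset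
  split
  · refine ⟨by rw [List.length_set]; exact hs.1, ?_⟩
    intro r hr
    by_cases hlen : i.toNat < g.length
    · rcases List.mem_or_eq_of_mem_set hr with hr' | rfl
      · exact hs.2 r hr'
      · rw [List.length_set, List.getD_eq_getElem g [] hlen]
        exact hs.2 _ (List.getElem_mem hlen)
    · rw [List.set_eq_of_length_le (by omega)] at hr
      exact hs.2 r hr
  · exact hs

theorem Vpr_mset_one (land : List (List Int)) (n m : Int) (v : List (List Int)) (i j : Int)
    (hone : oneB land n m (i, j) = true) (hs : ShapeM n m v) :
    Vpr land n m (mset v i j 1) = insert (i, j) (Vpr land n m v) := by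
  obtain ⟨h0, h1, h2, h3, _⟩ := oneB_bounds land n m (i, j) hone
  simp only at h0 h1 h2 h3
  have hsl := hs.1
  have hi : i.toNat < v.length := by omega
  have hj : j.toNat < (v.getD i.toNat []).length := by
    rw [List.getD_eq_getElem v [] hi, hs.2 _ (List.getElem_mem hi)]
    omega
  ext c
  rw [Finset.mem_insert, mem_Vpr, mem_Vpr]
  by_cases hc : c = (i, j)
  · subst hc
    simp only [mget_mset_self v i j 1 1 h0 h2 hi hj]
    simp [hone]
  · have hne : ¬(c.1 = i ∧ c.2 = j) := by
      intro hcc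
      exact hc (Prod.ext hcc.1 hcc.2)
    rw [mget_mset_ne v i j c.1 c.2 1 1 hne]
    simp [hc]

theorem Vpr_mset_not_one (land : List (List Int)) (n m : Int) (v : List (List Int)) (i j : Int)
    (hone : ¬ oneB land n m (i, j) = true) :
    Vpr land n m (mset v i j 1) = Vpr land n m v := by
  ext c
  rw [mem_Vpr, mem_Vpr]
  by_cases hc : c = (i, j)
  · subst hc
    simp [hone]
  · have hne : ¬(c.1 = i ∧ c.2 = j) := by
      intro hcc
      exact hc (Prod.ext hcc.1 hcc.2)
    rw [mget_mset_ne v i j c.1 c.2 1 1 hne]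

-- ---------- A's worklist instantiation ----------

def pushA : List (Int × Int) → Int × Int → List (Int × Int) := fun W d => W ++ [d]

theorem hlA : ∀ (W : List (Int × Int)) (e : Int × Int), (pushA W e).length = W.length + 1 := by
  intro W e; simp [pushA]

theorem hpA : ∀ (W : List (Int × Int)) (e : Int × Int), (pushA W e).Perm (e :: W) := by
  intro W e; exact List.perm_append_singleton e W

def dirsA : List (Int × Int) := [(0, 1), (1, 0), (0, -1), (-1, 0)]

theorem hdirsA : ∀ δ ∈ dirsA, (Prod.fst δ).natAbs + (Prod.snd δ).natAbs = 1 := by decide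

theorem hcovA : ∀ δ : Int × Int, δ.1.natAbs + δ.2.natAbs = 1 → δ ∈ dirsA := by
  rintro ⟨a, b⟩ h
  simp only [dirsA, List.mem_cons, List.not_mem_nil, or_false, Prod.mk.injEq]
  simp only at h
  omega

-- ---------- A's neighbour step is the generic worklist step ----------

theorem stepA_wlStep (land : List (List Int)) (n m y x : Int) (k : Nat) (δ : Int × Int)
    (hδy : dyA.getD k 0 = δ.1) (hδx : dxA.getD k 0 = δ.2)
    (st : List (List Int) × List (Int × Int)) (hs : ShapeM n m st.1) :
    Vpr land n m (stepA land n m y x k st).1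
        = (wlStep land n m pushA (y, x) (Vpr land n m st.1, st.2) δ).1
    ∧ (stepA land n m y x k st).2
        = (wlStep land n m pushA (y, x) (Vpr land n m st.1, st.2) δ).2
    ∧ ShapeM n m (stepA land n m y x k st).1 := by
  unfold stepA wlStep
  dsimp only
  rw [hδy, hδx]
  by_cases hb : 0 ≤ x + δ.2 ∧ x + δ.2 < m ∧ 0 ≤ y + δ.1 ∧ y + δ.1 < n
  · by_cases hv : mget st.1 (y + δ.1) (x + δ.2) 1 = 0
    · rw [if_pos ⟨hb.1, hb.2.1, hb.2.2.1, hb.2.2.2, hv⟩]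
      by_cases hl1 : mget land (y + δ.1) (x + δ.2) 0 = 1
      · have hone : oneB land n m (y + δ.1, x + δ.2) = true := by
          unfold oneB
          exact decide_eq_true ⟨hb.2.2.1, hb.2.2.2, hb.1, hb.2.1, hl1⟩
        have hnotin : (y + δ.1, x + δ.2) ∉ Vpr land n m st.1 := by
          rw [mem_Vpr]
          rintro ⟨_, hmm⟩
          exact hmm hv
        rw [if_pos hl1, if_pos ⟨hone, hnotin⟩]
        exact ⟨Vpr_mset_one land n m st.1 _ _ hone hs, rfl, mset_shape n m st.1 _ _ 1 hs⟩
      · have hone : ¬ oneB land n m (y + δ.1, x + δ.2) = true := by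
          unfold oneB
          simp only [decide_eq_true_eq]
          intro hc
          exact hl1 hc.2.2.2.2
        have hng : ¬ (oneB land n m (y + δ.1, x + δ.2) = true
            ∧ (y + δ.1, x + δ.2) ∉ Vpr land n m st.1) := fun hc => hone hc.1
        rw [if_neg hl1, if_neg hng]
        exact ⟨Vpr_mset_not_one land n m st.1 _ _ hone, rfl, mset_shape n m st.1 _ _ 1 hs⟩
    · have hga : ¬ (0 ≤ x + δ.2 ∧ x + δ.2 < m ∧ 0 ≤ y + δ.1 ∧ y + δ.1 < n
          ∧ mget st.1 (y + δ.1) (x + δ.2) 1 = 0) := fun hc => hv hc.2.2.2.2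
      have hgw : ¬ (oneB land n m (y + δ.1, x + δ.2) = true
          ∧ (y + δ.1, x + δ.2) ∉ Vpr land n m st.1) := by
        rintro ⟨hone, hnot⟩
        exact hnot ((mem_Vpr _ _ _ _ _).mpr ⟨hone, hv⟩)
      rw [if_neg hga, if_neg hgw]
      exact ⟨rfl, rfl, hs⟩
  · have hga : ¬ (0 ≤ x + δ.2 ∧ x + δ.2 < m ∧ 0 ≤ y + δ.1 ∧ y + δ.1 < n
        ∧ mget st.1 (y + δ.1) (x + δ.2) 1 = 0) :=
      fun hc => hb ⟨hc.1, hc.2.1, hc.2.2.1, hc.2.2.2.1⟩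
    have hgw : ¬ (oneB land n m (y + δ.1, x + δ.2) = true
        ∧ (y + δ.1, x + δ.2) ∉ Vpr land n m st.1) := by
      rintro ⟨hone, _⟩
      obtain ⟨b1, b2, b3, b4, _⟩ := oneB_bounds land n m _ hone
      exact hb ⟨b3, b4, b1, b2⟩
    rw [if_neg hga, if_neg hgw]
    exact ⟨rfl, rfl, hs⟩

theorem keysInsert_toFinset (rows : PySem.Dict Int Int) (x v : Int) :
    (rows.insert x v).keys.toFinset = insert x rows.keys.toFinset := by
  ext z
  simp [PySem.Dict.mem_keys_insert]

-- ---------- A's BFS loop is a worklist run ----------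

theorem mapA (land : List (List Int)) (n m : Int) :
    ∀ (v : List (List Int)) (q : List (Int × Int)) (rows : PySem.Dict Int Int) (oil : Int),
    ShapeM n m v → rows.keys.Nodup →
    (Vpr land n m (bfsA land n m v q rows oil).1
        = (wl land n m dirsA pushA hlA (Vpr land n m v) q oil rows.keys.toFinset).1
    ∧ ShapeM n m (bfsA land n m v q rows oil).1
    ∧ (bfsA land n m v q rows oil).2.2
        = (wl land n m dirsA pushA hlA (Vpr land n m v) q oil rows.keys.toFinset).2.1
    ∧ (bfsA land n m v q rows oil).2.1.keys.toFinset
        = (wl land n m dirsA pushA hlA (Vpr land n m v) q oil rows.keys.toFinset).2.2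
    ∧ (bfsA land n m v q rows oil).2.1.keys.Nodup) := by
  intro v q rows oil
  induction v, q, rows, oil using bfsA.induct land n m with
  | case1 v rows oil =>
    intro hs hnd
    rw [bfsA, wl]
    exact ⟨rfl, hs, rfl, rfl, hnd⟩
  | case2 v rows oil y x rest rows' oil' st0 ih =>
    intro hs hnd
    obtain ⟨e01, e02, sh0⟩ := stepA_wlStep land n m y x 0 (0, 1) rfl rfl (v, rest) hs
    obtain ⟨e11, e12, sh1⟩ := stepA_wlStep land n m y x 1 (1, 0) rfl rfl
      (stepA land n m y x 0 (v, rest)) sh0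
    obtain ⟨e21, e22, sh2⟩ := stepA_wlStep land n m y x 2 (0, -1) rfl rfl
      (stepA land n m y x 1 (stepA land n m y x 0 (v, rest))) sh1
    obtain ⟨e31, e32, sh3⟩ := stepA_wlStep land n m y x 3 (-1, 0) rfl rfl
      (stepA land n m y x 2 (stepA land n m y x 1 (stepA land n m y x 0 (v, rest)))) sh2
    rw [e01, e02] at e11 e12
    simp only [Prod.mk.eta] at e11 e12
    rw [e11, e12] at e21 e22
    simp only [Prod.mk.eta] at e21 e22
    rw [e21, e22] at e31 e32
    simp only [Prod.mk.eta] at e31 e32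
    rw [show st0 = stepA land n m y x 3 (stepA land n m y x 2 (stepA land n m y x 1
        (stepA land n m y x 0 (v, rest)))) from rfl] at ih
    rw [show rows' = rows.insert x x from rfl] at ih
    rw [show oil' = oil + 1 from rfl] at ih
    have ihs := ih sh3 (PySem.Dict.nodup_keys_insert rows x x hnd)
    rw [keysInsert_toFinset rows x x] at ihs
    rw [bfsA, wl]
    dsimp only
    simp only [dirsA, List.foldl_cons, List.foldl_nil]
    rw [← e31, ← e32]
    exact ihs

-- ---------- the 'for v in rows: answer[v] += oilnum' loop, as a pointwise update ----------

theorem aupd_getElem? (ans : List Int) (c x : Int) (h0 : 0 ≤ c) (hl : c.toNat < ans.length) :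
    ∀ k : Nat, (aupd ans c x)[k]?
      = ans[k]?.map (fun w => w + if (k : Int) = c then x else 0) := by
  intro k
  unfold aupd
  rw [PySem.List.pySetD_of_nonneg ans _ h0]
  have hlt : c < PySem.List.len ans := by
    simp only [PySem.List.len_eq]
    omega
  rw [PySem.List.pyGetD_eq_getElem ans 0 h0 hlt]
  by_cases hk : k = c.toNat
  · subst hk
    rw [List.getElem?_set_self', List.getElem?_eq_getElem hl]
    have hkc : ((c.toNat : Nat) : Int) = c := Int.toNat_of_nonneg h0
    rw [if_pos hkc]
    simp [Function.const]
  · rw [List.getElem?_set_ne (Ne.symm hk)]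
    have : ¬ ((k : Int) = c) := by omega
    rw [if_neg this]
    cases ans[k]? <;> simp

theorem aupd_fold (x : Int) : ∀ (L : List Int), L.Nodup → ∀ (ans : List Int),
    (∀ c ∈ L, 0 ≤ c ∧ c.toNat < ans.length) →
    ((L.foldl (fun a c => aupd a c x) ans).length = ans.length ∧
     ∀ k : Nat, (L.foldl (fun a c => aupd a c x) ans)[k]?
        = ans[k]?.map (fun w => w + if (k : Int) ∈ L then x else 0)) := by
  intro L
  induction L with
  | nil =>
    intro _ ans _
    refine ⟨rfl, ?_⟩
    intro k
    rw [List.foldl_nil]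
    cases hv : ans[k]? <;> simp [hv]
  | cons c t ih =>
    intro hnd ans hb
    obtain ⟨hc0, hcl⟩ := hb c List.mem_cons_self
    have hct : c ∉ t := (List.nodup_cons.mp hnd).1
    have hlen1 : (aupd ans c x).length = ans.length := by
      unfold aupd
      rw [PySem.List.length_pySetD]
    obtain ⟨ihl, ihe⟩ := ih (List.nodup_cons.mp hnd).2 (aupd ans c x)
      (fun e he => ⟨(hb e (List.mem_cons_of_mem _ he)).1,
        by rw [hlen1]; exact (hb e (List.mem_cons_of_mem _ he)).2⟩)
    refine ⟨by rw [List.foldl_cons, ihl, hlen1], ?_⟩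
    intro k
    rw [List.foldl_cons, ihe k, aupd_getElem? ans c x hc0 hcl k, Option.map_map]
    cases hv : ans[k]?
    · simp
    · simp only [Option.map_some, Function.comp]
      congr 1
      simp only [List.mem_cons]
      by_cases h1 : (k : Int) = c
      · have h2 : ¬ ((k : Int) ∈ t) := fun hmm => hct (h1 ▸ hmm)
        rw [if_pos h1, if_neg h2, if_pos (Or.inl h1)]
        ring
      · by_cases h2 : (k : Int) ∈ t
        · rw [if_neg h1, if_pos h2, if_pos (Or.inr h2)]
          ring
        · rw [if_neg h1, if_neg h2, if_neg (by rintro (h | h) <;> [exact h1 h; exact h2 h])]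
          ring

theorem getD_map_const {α β : Type} (l : List α) (b d : β) (k : Nat) (hk : k < l.length) :
    (l.map (fun _ => b)).getD k d = b := by
  rw [List.getD_eq_getElem _ _ (by simpa using hk)]
  simp



-- ---------- A's outer loop: invariant and characterization ----------

def touchC (land : List (List Int)) (n m : Int) (e : Int × Int) (k : Int) : Prop :=
  ∃ d ∈ compF land n m e, d.2 = k

noncomputable def cntV (land : List (List Int)) (n m : Int) (V : Finset (Int × Int))
    (k : Int) : Nat :=
  (@Finset.filter _ (fun e => touchC land n m e k) (Classical.decPred _) V).card

theorem cntV_gridOnes (land : List (List Int)) (n m k : Int) :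
    cntV land n m (gridOnes land n m) k = SpecCnt land n m k := rfl

theorem touchC_iff_colIm (land : List (List Int)) (n m : Int) (s e : Int × Int) (k : Int)
    (he : e ∈ compF land n m s) : touchC land n m e k ↔ k ∈ colIm (compF land n m s) := by
  rw [mem_compF] at he
  unfold touchC colIm
  rw [compF_eq_of_reach land n m he.2]
  constructor
  · rintro ⟨d, hd, rfl⟩
    exact Finset.mem_image.mpr ⟨d, hd, rfl⟩
  · intro hk
    obtain ⟨d, hd, hdk⟩ := Finset.mem_image.mp hk
    exact ⟨d, hd, hdk⟩

theorem cntV_union_comp (land : List (List Int)) (n m : Int) (V : Finset (Int × Int))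
    (s : Int × Int) (hd : ∀ e ∈ compF land n m s, e ∉ V) (k : Int) :
    cntV land n m (V ∪ compF land n m s) k
      = cntV land n m V k
        + (if k ∈ colIm (compF land n m s) then (compF land n m s).card else 0) := by
  classical
  unfold cntV
  rw [Finset.filter_union]
  rw [Finset.card_union_of_disjoint (by
    rw [Finset.disjoint_left]
    intro e he1 he2
    exact hd e (Finset.mem_of_mem_filter e he2) (Finset.mem_of_mem_filter e he1))]
  congr 1
  by_cases hk : k ∈ colIm (compF land n m s)
  · rw [if_pos hk]
    rw [Finset.filter_true_of_mem (fun e he => (touchC_iff_colIm land n m s e k he).mpr hk)]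
  · rw [if_neg hk]
    rw [Finset.card_eq_zero, Finset.filter_eq_empty_iff]
    intro e he
    exact fun ht => hk ((touchC_iff_colIm land n m s e k he).mp ht)

def stepOuterA (land : List (List Int)) (n m : Int)
    (st : List Int × List (List Int)) (c : Int × Int) : List Int × List (List Int) :=
  if mget st.2 c.1 c.2 1 = 0 then
    if mget land c.1 c.2 0 = 1 then
      let r := bfsA land n m (mset st.2 c.1 c.2 1) [(c.1, c.2)] (PySem.Dict.empty) 0
      ((r.2.1.keys).foldl (fun a cc => aupd a cc r.2.2) st.1, r.1)
    else (st.1, mset st.2 c.1 c.2 1)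
  else st

def PA (land : List (List Int)) (n m : Int) (done : List (Int × Int))
    (st : List Int × List (List Int)) : Prop :=
  st.1.length = m.toNat ∧ ShapeM n m st.2 ∧
  (∀ c ∈ Vpr land n m st.2, compF land n m c ⊆ Vpr land n m st.2) ∧
  (∀ e ∈ done, oneB land n m e = true → e ∈ Vpr land n m st.2) ∧
  (∀ k : Nat, k < m.toNat →
    st.1[k]? = some ((cntV land n m (Vpr land n m st.2) (k : Int) : Nat) : Int))

theorem stepA_inv (land : List (List Int)) (n m : Int) (done : List (Int × Int))
    (c : Int × Int) (hc : c ∈ allCells n m) (st : List Int × List (List Int))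
    (h : PA land n m done st) : PA land n m (done ++ [c]) (stepOuterA land n m st c) := by
  obtain ⟨i, j⟩ := c
  obtain ⟨hlen, hshape, hclo, hdone, hcnt⟩ := h
  obtain ⟨hi0, hin, hj0, hjm⟩ := (mem_allCells n m (i, j)).mp hc
  simp only at hi0 hin hj0 hjm
  unfold stepOuterA
  by_cases hvis : mget st.2 i j 1 = 0
  · rw [if_pos hvis]
    by_cases hoil : mget land i j 0 = 1
    · rw [if_pos hoil]
      dsimp only
      have hone : oneB land n m (i, j) = true := by
        unfold oneB
        exact decide_eq_true ⟨hi0, hin, hj0, hjm, hoil⟩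
      have hnotV : (i, j) ∉ Vpr land n m st.2 := by
        rw [mem_Vpr]
        rintro ⟨_, hm2⟩
        exact hm2 hvis
      have hdisjR : ∀ e, ReachP land n m (i, j) e → e ∈ Vpr land n m st.2 → False := by
        intro e hr he
        exact hnotV (hclo e he ((mem_compF land n m e (i, j)).mpr ⟨hone, reach_symm land n m hr⟩))
      have hshape1 : ShapeM n m (mset st.2 i j 1) := mset_shape n m st.2 i j 1 hshape
      have hVone : Vpr land n m (mset st.2 i j 1) = insert (i, j) (Vpr land n m st.2) :=
        Vpr_mset_one land n m st.2 i j hone hshape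
      set V := Vpr land n m st.2 with hVdef
      set K := compF land n m (i, j) with hKdef
      have hwlA := wl_spec land n m dirsA pushA hlA hpA hdirsA hcovA (i, j) hone
        (insert (i, j) V) [(i, j)] 0 ∅ (List.nodup_singleton _)
        (by intro e he
            rw [List.mem_singleton] at he
            subst he
            exact ⟨Finset.mem_insert_self _ _, Relation.ReflTransGen.refl⟩)
        (by intro e hr he hen d hadj
            rcases Finset.mem_insert.mp he with rfl | he'
            · exact absurd (List.mem_singleton.mpr rfl) hen
            · exact absurd he' (fun hq => hdisjR e hr hq))
        (Finset.mem_insert_self _ _)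
      have hm := mapA land n m (mset st.2 i j 1) [(i, j)] PySem.Dict.empty 0 hshape1
        PySem.Dict.nodup_keys_empty
      have hkeysE : (PySem.Dict.empty : PySem.Dict Int Int).keys.toFinset = (∅ : Finset Int) := rfl
      rw [hVone, hkeysE, hwlA] at hm
      obtain ⟨hA1, hA2, hA3, hA4, hA5⟩ := hm
      set r := bfsA land n m (mset st.2 i j 1) [(i, j)] PySem.Dict.empty 0 with hrdef
      -- basic component facts
      have hcK : (i, j) ∈ K := (mem_compF land n m (i, j) (i, j)).mpr
        ⟨hone, Relation.ReflTransGen.refl⟩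
      have hKV : ∀ e ∈ K, e ∉ V := fun e heK heV =>
        hdisjR e ((mem_compF land n m (i, j) e).mp heK).2 heV
      have hunion : insert (i, j) V ∪ K = V ∪ K := by
        ext e
        simp only [Finset.mem_union, Finset.mem_insert]
        constructor
        · rintro (( rfl | h) | h)
          · exact Or.inr hcK
          · exact Or.inl h
          · exact Or.inr h
        · rintro (h | h)
          · exact Or.inl (Or.inr h)
          · exact Or.inr h
      have hKdiff : K \ insert (i, j) V = K.erase (i, j) := by
        ext e
        simp only [Finset.mem_sdiff, Finset.mem_insert, Finset.mem_erase]
        constructor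
        · rintro ⟨h1, h2⟩
          push_neg at h2
          exact ⟨h2.1, h1⟩
        · rintro ⟨h1, h2⟩
          exact ⟨h2, by push_neg; exact ⟨h1, hKV e h2⟩⟩
      have hKpos : 1 ≤ K.card := Finset.card_pos.mpr ⟨(i, j), hcK⟩
      have hoilnum : r.2.2 = (K.card : Int) := by
        rw [hA3, hKdiff, Finset.card_erase_of_mem hcK]
        simp only [List.length_cons, List.length_nil]
        push_cast [Nat.cast_sub hKpos]
        ring
      have hkeysK : r.2.1.keys.toFinset = colIm K := by
        rw [hA4, hKdiff]
        have hsets : ([((i : Int), (j : Int))].toFinset ∪ K.erase (i, j)) = K := by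
          ext e
          simp only [Finset.mem_union, List.mem_toFinset, List.mem_singleton, Finset.mem_erase]
          constructor
          · rintro (rfl | ⟨_, h⟩)
            · exact hcK
            · exact h
          · intro heK
            by_cases he : e = (i, j)
            · exact Or.inl he
            · exact Or.inr ⟨he, heK⟩
        rw [Finset.empty_union, hsets]
      -- the answer update
      have hbounds : ∀ col ∈ r.2.1.keys, 0 ≤ col ∧ col.toNat < st.1.length := by
        intro col hcol
        have : col ∈ colIm K := hkeysK ▸ List.mem_toFinset.mpr hcol
        obtain ⟨d, hdK, rfl⟩ := Finset.mem_image.mp this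
        obtain ⟨_, _, hd3, hd4, _⟩ :=
          oneB_bounds land n m d ((mem_compF land n m (i, j) d).mp hdK).1
        rw [hlen]
        omega
      obtain ⟨hflen, hfget⟩ := aupd_fold r.2.2 r.2.1.keys hA5 st.1 hbounds
      refine ⟨?_, hA2, ?_, ?_, ?_⟩
      · rw [hflen, hlen]
      · -- visited stays closed under components
        rw [hA1, hunion]
        intro e he
        rcases Finset.mem_union.mp he with h | h
        · intro d hd
          exact Finset.mem_union_left _ (hclo e h hd)
        · intro d hd
          have hce : compF land n m e = K :=
            compF_eq_of_reach land n m ((mem_compF land n m (i, j) e).mp h).2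
          rw [hce] at hd
          exact Finset.mem_union_right _ hd
      · -- processed oil cells are visited
        intro e he hoe
        rw [hA1, hunion]
        rcases List.mem_append.mp he with h | h
        · exact Finset.mem_union_left _ (hdone e h hoe)
        · rw [List.mem_singleton] at h
          subst h
          exact Finset.mem_union_right _ hcK
      · -- the answer entries
        intro k hk
        rw [hfget k, hcnt k hk, hA1, hunion,
          cntV_union_comp land n m V (i, j) hKV (k : Int)]
        have hmemiff : ((k : Int) ∈ r.2.1.keys) ↔ (k : Int) ∈ colIm K := by
          rw [← List.mem_toFinset, hkeysK]
        by_cases hcol : (k : Int) ∈ colIm K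
        · rw [if_pos (hmemiff.mpr hcol), if_pos hcol, hoilnum]
          simp only [Option.map_some]
          push_cast
          rfl
        · rw [if_neg (fun hx => hcol (hmemiff.mp hx)), if_neg hcol]
          simp
    · rw [if_neg hoil]
      have honeF : ¬ oneB land n m (i, j) = true := by
        unfold oneB
        simp only [decide_eq_true_eq]
        intro hcc
        exact hoil hcc.2.2.2.2
      have hVeq : Vpr land n m (mset st.2 i j 1) = Vpr land n m st.2 :=
        Vpr_mset_not_one land n m st.2 i j honeF
      refine ⟨hlen, mset_shape n m st.2 i j 1 hshape, by rw [hVeq]; exact hclo, ?_, ?_⟩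
      · intro e he hoe
        rw [hVeq]
        rcases List.mem_append.mp he with h | h
        · exact hdone e h hoe
        · rw [List.mem_singleton] at h
          subst h
          exact absurd hoe honeF
      · intro k hk
        rw [hVeq]
        exact hcnt k hk
  · rw [if_neg hvis]
    refine ⟨hlen, hshape, hclo, ?_, hcnt⟩
    intro e he hoe
    rcases List.mem_append.mp he with h | h
    · exact hdone e h hoe
    · rw [List.mem_singleton] at h
      subst h
      exact (mem_Vpr land n m st.2 (i, j)).mpr ⟨hoe, hvis⟩


-- ---------- A: initial state and final characterization ----------

theorem PA_init (land : List (List Int)) (n m : Int) :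
    PA land n m []
      ((PySem.List.pyRange 0 m 1).map (fun _ => (0 : Int)),
       (PySem.List.pyRange 0 n 1).map
         (fun _ => (PySem.List.pyRange 0 m 1).map (fun _ => (0 : Int)))) := by
  have hVempty : Vpr land n m ((PySem.List.pyRange 0 n 1).map
      (fun _ => (PySem.List.pyRange 0 m 1).map (fun _ => (0 : Int)))) = ∅ := by
    rw [Finset.eq_empty_iff_forall_notMem]
    intro c hcm
    obtain ⟨hone, hne⟩ := (mem_Vpr land n m _ c).mp hcm
    obtain ⟨h1, h2, h3, h4, _⟩ := oneB_bounds land n m c hone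
    apply hne
    unfold mget
    rw [if_pos ⟨h1, h3⟩]
    rw [getD_map_const _ _ _ _ (by rw [PySem.List.length_pyRange_one]; omega)]
    rw [getD_map_const _ _ _ _ (by rw [PySem.List.length_pyRange_one]; omega)]
  refine ⟨?_, ⟨?_, ?_⟩, ?_, ?_, ?_⟩
  · simp only [List.length_map]
    rw [PySem.List.length_pyRange_one]
    norm_num
  · simp only [List.length_map]
    rw [PySem.List.length_pyRange_one]
    norm_num
  · intro rrow hrrow
    obtain ⟨_, _, rfl⟩ := List.mem_map.mp hrrow
    simp only [List.length_map]
    rw [PySem.List.length_pyRange_one]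
    norm_num
  · rw [hVempty]
    intro c hcm
    exact absurd hcm (Finset.notMem_empty c)
  · intro e he
    exact absurd he List.not_mem_nil
  · intro k hk
    rw [hVempty]
    have hklen : k < (PySem.List.pyRange 0 m 1).length := by
      rw [PySem.List.length_pyRange_one]
      omega
    rw [List.getElem?_map, List.getElem?_eq_getElem hklen, Option.map_some]
    have hcnt0 : cntV land n m (∅ : Finset (Int × Int)) (k : Int) = 0 := by
      unfold cntV
      simp
    rw [hcnt0]
    norm_num

theorem A_char (land : List (List Int)) (n m : Int) :
    ((allCells n m).foldl (stepOuterA land n m)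
        ((PySem.List.pyRange 0 m 1).map (fun _ => (0 : Int)),
         (PySem.List.pyRange 0 n 1).map
           (fun _ => (PySem.List.pyRange 0 m 1).map (fun _ => (0 : Int))))).1
      = specAns land n m := by
  obtain ⟨hlen, _, _, hdone, hcnt⟩ := fold_pref (stepOuterA land n m)
      (fun a => a ∈ allCells n m) (PA land n m)
      (fun done a st hQ hP => stepA_inv land n m done a hQ st hP)
      (allCells n m) []
      ((PySem.List.pyRange 0 m 1).map (fun _ => (0 : Int)),
       (PySem.List.pyRange 0 n 1).map
         (fun _ => (PySem.List.pyRange 0 m 1).map (fun _ => (0 : Int))))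
      (fun a ha => ha) (PA_init land n m)
  have hVG : Vpr land n m ((allCells n m).foldl (stepOuterA land n m)
      ((PySem.List.pyRange 0 m 1).map (fun _ => (0 : Int)),
       (PySem.List.pyRange 0 n 1).map
         (fun _ => (PySem.List.pyRange 0 m 1).map (fun _ => (0 : Int))))).2
      = gridOnes land n m := by
    apply Finset.Subset.antisymm
    · exact Finset.filter_subset _ _
    · intro e he
      have hone := (mem_gridOnes land n m e).mp he
      obtain ⟨b1, b2, b3, b4, _⟩ := oneB_bounds land n m e hone
      exact hdone e ((mem_allCells n m e).mpr ⟨b1, b2, b3, b4⟩) hone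
  apply List.ext_getElem?
  intro k
  by_cases hk : k < m.toNat
  · rw [hcnt k hk, hVG, cntV_gridOnes]
    unfold specAns
    have hklen : k < (PySem.List.pyRange 0 m 1).length := by
      rw [PySem.List.length_pyRange_one]
      omega
    rw [List.getElem?_map, List.getElem?_eq_getElem hklen, Option.map_some]
    have hval : (PySem.List.pyRange 0 m 1)[k] = (k : Int) := by
      rw [PySem.List.getElem_pyRange_one]
      omega
    rw [hval]
  · rw [List.getElem?_eq_none (by rw [hlen]; omega),
      List.getElem?_eq_none (by
        unfold specAns
        rw [List.length_map, PySem.List.length_pyRange_one]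
        omega)]

theorem solution_eq_spec (land : List (List Int)) :
    solution land = (PySem.List.max? (specAns land (PySem.List.len land)
        (PySem.List.len (PySem.List.pyGetD land 0 []))) (fun z => z)).getD 0 := by
  have h1 : solution land = (PySem.List.max?
      (((allCells (PySem.List.len land) (PySem.List.len (PySem.List.pyGetD land 0 []))).foldl
        (stepOuterA land (PySem.List.len land) (PySem.List.len (PySem.List.pyGetD land 0 [])))
        ((PySem.List.pyRange 0 (PySem.List.len (PySem.List.pyGetD land 0 [])) 1).map
            (fun _ => (0 : Int)),
         (PySem.List.pyRange 0 (PySem.List.len land) 1).map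
           (fun _ => (PySem.List.pyRange 0 (PySem.List.len (PySem.List.pyGetD land 0 [])) 1).map
             (fun _ => (0 : Int))))).1)
      (fun z => z)).getD 0 := by
    rw [← nested_fold_eq_cells]
    rfl
  rw [h1, A_char]

-- ---------- union-find: well-formedness, fuel adequacy, the link lemma ----------

def UFWF (p : List Int) : Prop :=
  ∀ k : Nat, k < p.length → 0 ≤ p.getD k 0 ∧ p.getD k 0 ≤ (k : Int)

def rootP (p : List Int) (a : Int) : Int := ufFind p p.length a

theorem pyGetD_in (p : List Int) (a : Int) (h0 : 0 ≤ a) (hl : a < (p.length : Int)) :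
    PySem.List.pyGetD p a a = p.getD a.toNat 0 := by
  rw [PySem.List.pyGetD_eq_getElem p a h0 (by first | omega | simp only [PySem.List.len_eq]; omega),
    List.getD_eq_getElem p 0 (by omega)]

theorem ufFind_succ (p : List Int) (f : Nat) (a : Int) :
    ufFind p (f + 1) a
      = if PySem.List.pyGetD p a a = a then a else ufFind p f (PySem.List.pyGetD p a a) := rfl

theorem ufFind_fuel (p : List Int) (hwf : UFWF p) :
    ∀ (t : Nat) (a : Int), 0 ≤ a → a < (p.length : Int) → a.toNat ≤ t →
    ∀ f g : Nat, a.toNat < f → a.toNat < g → ufFind p f a = ufFind p g a := by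
  intro t
  induction t with
  | zero =>
    intro a h0 hl ht f g hf hg
    obtain ⟨f', rfl⟩ : ∃ f', f = f' + 1 := ⟨f - 1, by omega⟩
    obtain ⟨g', rfl⟩ : ∃ g', g = g' + 1 := ⟨g - 1, by omega⟩
    rw [ufFind_succ, ufFind_succ, pyGetD_in p a h0 hl]
    have hpa := hwf a.toNat (by omega)
    have hfix : p.getD a.toNat 0 = a := by omega
    rw [if_pos hfix, if_pos hfix]
  | succ t ih =>
    intro a h0 hl ht f g hf hg
    obtain ⟨f', rfl⟩ : ∃ f', f = f' + 1 := ⟨f - 1, by omega⟩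
    obtain ⟨g', rfl⟩ : ∃ g', g = g' + 1 := ⟨g - 1, by omega⟩
    rw [ufFind_succ, ufFind_succ, pyGetD_in p a h0 hl]
    have hpa := hwf a.toNat (by omega)
    by_cases hfix : p.getD a.toNat 0 = a
    · rw [if_pos hfix, if_pos hfix]
    · rw [if_neg hfix, if_neg hfix]
      exact ih (p.getD a.toNat 0) (by omega) (by omega) (by omega) f' g' (by omega) (by omega)

theorem rootP_step (p : List Int) (hwf : UFWF p) (a : Int) (h0 : 0 ≤ a)
    (hl : a < (p.length : Int)) :
    rootP p a = if p.getD a.toNat 0 = a then a else rootP p (p.getD a.toNat 0) := by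
  unfold rootP
  obtain ⟨f', hf⟩ : ∃ f', p.length = f' + 1 := ⟨p.length - 1, by omega⟩
  conv_lhs => rw [hf]
  rw [ufFind_succ, pyGetD_in p a h0 hl]
  by_cases hfix : p.getD a.toNat 0 = a
  · rw [if_pos hfix, if_pos hfix]
  · rw [if_neg hfix, if_neg hfix]
    have hpa := hwf a.toNat (by omega)
    exact ufFind_fuel p hwf (p.getD a.toNat 0).toNat (p.getD a.toNat 0)
      (by omega) (by omega) le_rfl f' p.length (by omega) (by omega)

theorem rootP_props (p : List Int) (hwf : UFWF p) :
    ∀ (t : Nat) (a : Int), 0 ≤ a → a < (p.length : Int) → a.toNat ≤ t →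
    0 ≤ rootP p a ∧ rootP p a ≤ a ∧ p.getD (rootP p a).toNat 0 = rootP p a := by
  intro t
  induction t with
  | zero =>
    intro a h0 hl ht
    have hpa := hwf a.toNat (by omega)
    have hfix : p.getD a.toNat 0 = a := by omega
    rw [rootP_step p hwf a h0 hl, if_pos hfix]
    exact ⟨h0, le_refl a, hfix⟩
  | succ t ih =>
    intro a h0 hl ht
    have hpa := hwf a.toNat (by omega)
    rw [rootP_step p hwf a h0 hl]
    by_cases hfix : p.getD a.toNat 0 = a
    · rw [if_pos hfix]
      exact ⟨h0, le_refl a, hfix⟩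
    · rw [if_neg hfix]
      obtain ⟨r0, r1, r2⟩ := ih (p.getD a.toNat 0) (by omega) (by omega) (by omega)
      exact ⟨r0, by omega, r2⟩

theorem UFWF_set (p : List Int) (hwf : UFWF p) (rb ra : Int) (h0 : 0 ≤ ra)
    (hab : ra ≤ rb) (hbl : rb < (p.length : Int)) :
    UFWF (p.set rb.toNat ra) := by
  intro k hk
  rw [List.length_set] at hk
  by_cases hkb : k = rb.toNat
  · rw [hkb] at hk ⊢
    rw [getD_set_self' p rb.toNat ra 0 hk]
    exact ⟨h0, by omega⟩
  · rw [getD_set_ne' p rb.toNat k ra 0 hkb]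
    exact hwf k hk

theorem rootP_link (p : List Int) (hwf : UFWF p) (ra rb : Int)
    (h0 : 0 ≤ ra) (hab : ra < rb) (hbl : rb < (p.length : Int))
    (hra : p.getD ra.toNat 0 = ra) (hrb : p.getD rb.toNat 0 = rb) :
    ∀ (t : Nat) (a : Int), 0 ≤ a → a < (p.length : Int) → a.toNat ≤ t →
    rootP (p.set rb.toNat ra) a = if rootP p a = rb then ra else rootP p a := by
  have hwf' : UFWF (p.set rb.toNat ra) := UFWF_set p hwf rb ra h0 (le_of_lt hab) hbl
  have hlen' : ((p.set rb.toNat ra).length : Int) = (p.length : Int) := by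
    rw [List.length_set]
  intro t
  induction t with
  | zero =>
    intro a h0a hla hta
    have hpa := hwf a.toNat (by omega)
    have hfa : p.getD a.toNat 0 = a := by omega
    have hanb : a ≠ rb := by omega
    have hfa' : (p.set rb.toNat ra).getD a.toNat 0 = a := by
      rw [getD_set_ne' p rb.toNat a.toNat ra 0 (by omega), hfa]
    rw [rootP_step _ hwf' a h0a (by omega), if_pos hfa']
    rw [rootP_step p hwf a h0a hla, if_pos hfa]
    rw [if_neg hanb]
  | succ t ih =>
    intro a h0a hla hta
    by_cases hax : a = rb
    · rw [hax]
      have hq : (p.set rb.toNat ra).getD rb.toNat 0 = ra :=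
        getD_set_self' p rb.toNat ra 0 (by omega)
      have hraq : (p.set rb.toNat ra).getD ra.toNat 0 = ra := by
        rw [getD_set_ne' p rb.toNat ra.toNat ra 0 (by omega), hra]
      have hroota : rootP (p.set rb.toNat ra) ra = ra := by
        rw [rootP_step _ hwf' ra h0 (by omega), if_pos hraq]
      have hrootb : rootP p rb = rb := by
        rw [rootP_step p hwf rb (by omega) hbl, if_pos hrb]
      rw [rootP_step _ hwf' rb (by omega) (by omega), hq, if_neg (by omega), hroota,
        hrootb, if_pos rfl]
    · have hqa : (p.set rb.toNat ra).getD a.toNat 0 = p.getD a.toNat 0 := by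
        rw [getD_set_ne' p rb.toNat a.toNat ra 0 (by omega)]
      have hpa := hwf a.toNat (by omega)
      by_cases hfix : p.getD a.toNat 0 = a
      · rw [rootP_step _ hwf' a h0a (by omega), hqa, if_pos hfix]
        rw [rootP_step p hwf a h0a hla, if_pos hfix, if_neg hax]
      · rw [rootP_step _ hwf' a h0a (by omega), hqa, if_neg hfix]
        rw [rootP_step p hwf a h0a hla, if_neg hfix]
        exact ih (p.getD a.toNat 0) (by omega) (by omega) (by omega)

theorem ufUnion_spec (p : List Int) (hwf : UFWF p) (a b : Int)
    (ha0 : 0 ≤ a) (hal : a < (p.length : Int)) (hb0 : 0 ≤ b) (hbl : b < (p.length : Int)) :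
    UFWF (ufUnion p a b) ∧ (ufUnion p a b).length = p.length ∧
    ∀ x y : Int, 0 ≤ x → x < (p.length : Int) → 0 ≤ y → y < (p.length : Int) →
      (rootP (ufUnion p a b) x = rootP (ufUnion p a b) y ↔
        (rootP p x = rootP p y ∨
         (rootP p x = rootP p a ∧ rootP p y = rootP p b) ∨
         (rootP p x = rootP p b ∧ rootP p y = rootP p a))) := by
  obtain ⟨hra0, hral, hrafix⟩ := rootP_props p hwf a.toNat a ha0 hal le_rfl
  obtain ⟨hrb0, hrbl, hrbfix⟩ := rootP_props p hwf b.toNat b hb0 hbl le_rfl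
  have hueq : ufUnion p a b
      = if rootP p a ≠ rootP p b then
          (if rootP p a < rootP p b then PySem.List.pySetD p (rootP p b) (rootP p a)
           else PySem.List.pySetD p (rootP p a) (rootP p b))
        else p := rfl
  by_cases hne : rootP p a = rootP p b
  · rw [hueq, if_neg (not_not_intro hne)]
    refine ⟨hwf, rfl, ?_⟩
    intro x y _ _ _ _
    constructor
    · exact Or.inl
    · rintro (h | ⟨h1, h2⟩ | ⟨h1, h2⟩) <;> omega
  · rcases lt_or_gt_of_ne hne with hlt | hgt
    · have hq : ufUnion p a b = p.set (rootP p b).toNat (rootP p a) := by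
        rw [hueq, if_pos hne, if_pos hlt, PySem.List.pySetD_of_nonneg p _ (by omega)]
      have hlink := rootP_link p hwf (rootP p a) (rootP p b) hra0 hlt (by omega) hrafix hrbfix
      refine ⟨hq ▸ UFWF_set p hwf (rootP p b) (rootP p a) hra0 (le_of_lt hlt) (by omega),
        by rw [hq, List.length_set], ?_⟩
      intro x y hx0 hxl hy0 hyl
      rw [hq, hlink x.toNat x hx0 hxl le_rfl, hlink y.toNat y hy0 hyl le_rfl]
      split_ifs <;> omega
    · have hq : ufUnion p a b = p.set (rootP p a).toNat (rootP p b) := by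
        rw [hueq, if_pos hne, if_neg (by omega), PySem.List.pySetD_of_nonneg p _ (by omega)]
      have hlink := rootP_link p hwf (rootP p b) (rootP p a) hrb0 hgt (by omega) hrbfix hrafix
      refine ⟨hq ▸ UFWF_set p hwf (rootP p a) (rootP p b) hrb0 (le_of_lt hgt) (by omega),
        by rw [hq, List.length_set], ?_⟩
      intro x y hx0 hxl hy0 hyl
      rw [hq, hlink x.toNat x hx0 hxl le_rfl, hlink y.toNat y hy0 hyl le_rfl]
      split_ifs <;> omega

theorem uf_init (N : Int) (hN : 0 ≤ N) :
    UFWF (PySem.List.pyRange 0 N 1) ∧ (((PySem.List.pyRange 0 N 1).length : Nat) : Int) = N ∧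
    ∀ a : Int, 0 ≤ a → a < N → rootP (PySem.List.pyRange 0 N 1) a = a := by
  have hlen : (PySem.List.pyRange 0 N 1).length = (N - 0).toNat :=
    PySem.List.length_pyRange_one 0 N
  have hget : ∀ k : Nat, k < (PySem.List.pyRange 0 N 1).length →
      (PySem.List.pyRange 0 N 1).getD k 0 = (k : Int) := by
    intro k hk
    rw [List.getD_eq_getElem _ 0 hk, PySem.List.getElem_pyRange_one]
    omega
  have hwf : UFWF (PySem.List.pyRange 0 N 1) := by
    intro k hk
    rw [hget k hk]
    exact ⟨by omega, le_refl _⟩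
  refine ⟨hwf, by omega, ?_⟩
  intro a h0 hl
  rw [rootP_step _ hwf a h0 (by omega), if_pos (by rw [hget a.toNat (by omega)]; omega)]

-- ---------- the equivalence closure of an edge list ----------

theorem eqvGen_false_iff {α : Type} (x y : α) :
    Relation.EqvGen (fun _ _ => False) x y ↔ x = y := by
  constructor
  · intro h
    induction h with
    | rel _ _ h => exact h.elim
    | refl => rfl
    | symm _ _ _ ih => exact ih.symm
    | trans _ _ _ _ _ ih1 ih2 => exact ih1.trans ih2
  · rintro rfl
    exact Relation.EqvGen.refl _

theorem eqvGen_congr {α : Type} {r s : α → α → Prop} (h : ∀ x y, r x y ↔ s x y) (x y : α) :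
    Relation.EqvGen r x y ↔ Relation.EqvGen s x y :=
  ⟨Relation.EqvGen.mono (fun u v hr => (h u v).mp hr),
   Relation.EqvGen.mono (fun u v hr => (h u v).mpr hr)⟩

theorem eqvGen_add_edge {α : Type} (r : α → α → Prop) (a b : α) (x y : α) :
    Relation.EqvGen (fun u v => r u v ∨ (u = a ∧ v = b)) x y ↔
      (Relation.EqvGen r x y ∨
       (Relation.EqvGen r x a ∧ Relation.EqvGen r b y) ∨
       (Relation.EqvGen r x b ∧ Relation.EqvGen r a y)) := by
  constructor
  · intro h
    induction h with
    | rel u v huv =>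
      rcases huv with h' | ⟨rfl, rfl⟩
      · exact Or.inl (Relation.EqvGen.rel _ _ h')
      · exact Or.inr (Or.inl ⟨Relation.EqvGen.refl _, Relation.EqvGen.refl _⟩)
    | refl u => exact Or.inl (Relation.EqvGen.refl _)
    | symm u v _ ih =>
      rcases ih with h' | ⟨h1, h2⟩ | ⟨h1, h2⟩
      · exact Or.inl (Relation.EqvGen.symm _ _ h')
      · exact Or.inr (Or.inr ⟨Relation.EqvGen.symm _ _ h2, Relation.EqvGen.symm _ _ h1⟩)
      · exact Or.inr (Or.inl ⟨Relation.EqvGen.symm _ _ h2, Relation.EqvGen.symm _ _ h1⟩)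
    | trans u v w _ _ ih1 ih2 =>
      rcases ih1 with h1 | ⟨h1, h1'⟩ | ⟨h1, h1'⟩ <;>
        rcases ih2 with h2 | ⟨h2, h2'⟩ | ⟨h2, h2'⟩
      · exact Or.inl (Relation.EqvGen.trans _ _ _ h1 h2)
      · exact Or.inr (Or.inl ⟨Relation.EqvGen.trans _ _ _ h1 h2, h2'⟩)
      · exact Or.inr (Or.inr ⟨Relation.EqvGen.trans _ _ _ h1 h2, h2'⟩)
      · exact Or.inr (Or.inl ⟨h1, Relation.EqvGen.trans _ _ _ h1' h2⟩)
      · exact Or.inl (Relation.EqvGen.trans _ _ _ h1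
          (Relation.EqvGen.trans _ _ _
            (Relation.EqvGen.symm _ _ (Relation.EqvGen.trans _ _ _ h1' h2)) h2'))
      · exact Or.inl (Relation.EqvGen.trans _ _ _ h1 h2')
      · exact Or.inr (Or.inr ⟨h1, Relation.EqvGen.trans _ _ _ h1' h2⟩)
      · exact Or.inl (Relation.EqvGen.trans _ _ _ h1 h2')
      · exact Or.inl (Relation.EqvGen.trans _ _ _ h1
          (Relation.EqvGen.trans _ _ _
            (Relation.EqvGen.symm _ _ (Relation.EqvGen.trans _ _ _ h1' h2)) h2'))
  · rintro (h' | ⟨h1, h2⟩ | ⟨h1, h2⟩)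
    · exact Relation.EqvGen.mono (fun u v hr => Or.inl hr) h'
    · exact Relation.EqvGen.trans _ _ _
        (Relation.EqvGen.mono (fun u v hr => Or.inl hr) h1)
        (Relation.EqvGen.trans _ _ _ (Relation.EqvGen.rel a b (Or.inr ⟨rfl, rfl⟩))
          (Relation.EqvGen.mono (fun u v hr => Or.inl hr) h2))
    · exact Relation.EqvGen.trans _ _ _
        (Relation.EqvGen.mono (fun u v hr => Or.inl hr) h1)
        (Relation.EqvGen.trans _ _ _
          (Relation.EqvGen.symm _ _ (Relation.EqvGen.rel a b (Or.inr ⟨rfl, rfl⟩)))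
          (Relation.EqvGen.mono (fun u v hr => Or.inl hr) h2))



-- ---------- encoding cells as indices i*m+j ----------

def encC (m : Int) (e : Int × Int) : Int := e.1 * m + e.2

theorem encC_bounds (n m : Int) (e : Int × Int)
    (h1 : 0 ≤ e.1) (h2 : e.1 < n) (h3 : 0 ≤ e.2) (h4 : e.2 < m) :
    0 ≤ encC m e ∧ encC m e < n * m := by
  unfold encC
  have hm0 : 0 ≤ m := by omega
  have hnn : 0 ≤ e.1 * m := mul_nonneg h1 hm0
  have hstep : (e.1 + 1) * m ≤ n * m := mul_le_mul_of_nonneg_right (by omega) hm0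
  rw [add_mul, one_mul] at hstep
  exact ⟨by omega, by omega⟩

theorem encC_inj (m : Int) (e e' : Int × Int)
    (h3 : 0 ≤ e.2) (h4 : e.2 < m) (h3' : 0 ≤ e'.2) (h4' : e'.2 < m)
    (h : encC m e = encC m e') : e = e' := by
  unfold encC at h
  have h1 : e.1 = e'.1 := by
    rcases lt_trichotomy e.1 e'.1 with hlt | heq | hgt
    · exfalso
      have hmono : (e.1 + 1) * m ≤ e'.1 * m :=
        mul_le_mul_of_nonneg_right (by omega) (by omega)
      rw [add_mul, one_mul] at hmono
      omega
    · exact heq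
    · exfalso
      have hmono : (e'.1 + 1) * m ≤ e.1 * m :=
        mul_le_mul_of_nonneg_right (by omega) (by omega)
      rw [add_mul, one_mul] at hmono
      omega
  rw [h1] at h
  exact Prod.ext h1 (by omega)

-- ---------- the processed right/down edges and the union-pass invariant ----------

def rdEdge (land : List (List Int)) (n m : Int) (S : Int × Int → Prop) (u v : Int × Int) : Prop :=
  S u ∧ oneB land n m u = true ∧ oneB land n m v = true ∧
    (v = (u.1, u.2 + 1) ∨ v = (u.1 + 1, u.2))

def IB (land : List (List Int)) (n m : Int) (done : List (Int × Int)) (p : List Int) : Prop :=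
  UFWF p ∧ ((p.length : Nat) : Int) = n * m ∧
  ∀ e e' : Int × Int, oneB land n m e = true → oneB land n m e' = true →
    (rootP p (encC m e) = rootP p (encC m e') ↔
      Relation.EqvGen (rdEdge land n m (fun u => u ∈ done)) e e')

theorem union_step (land : List (List Int)) (n m : Int) (rr : Int × Int → Int × Int → Prop)
    (p : List Int) (hwf : UFWF p) (hplen : ((p.length : Nat) : Int) = n * m)
    (hiff : ∀ e e', oneB land n m e = true → oneB land n m e' = true →
      (rootP p (encC m e) = rootP p (encC m e') ↔ Relation.EqvGen rr e e'))
    (a b : Int × Int) (ha : oneB land n m a = true) (hb : oneB land n m b = true) :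
    UFWF (ufUnion p (encC m a) (encC m b)) ∧
    (((ufUnion p (encC m a) (encC m b)).length : Nat) : Int) = n * m ∧
    ∀ e e', oneB land n m e = true → oneB land n m e' = true →
      (rootP (ufUnion p (encC m a) (encC m b)) (encC m e)
          = rootP (ufUnion p (encC m a) (encC m b)) (encC m e') ↔
        Relation.EqvGen (fun u v => rr u v ∨ (u = a ∧ v = b)) e e') := by
  obtain ⟨a1, a2, a3, a4, _⟩ := oneB_bounds land n m a ha
  obtain ⟨b1, b2, b3, b4, _⟩ := oneB_bounds land n m b hb
  obtain ⟨hea0, heal⟩ := encC_bounds n m a a1 a2 a3 a4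
  obtain ⟨heb0, hebl⟩ := encC_bounds n m b b1 b2 b3 b4
  obtain ⟨hwf', hlen', hiff'⟩ := ufUnion_spec p hwf (encC m a) (encC m b)
    hea0 (by omega) heb0 (by omega)
  refine ⟨hwf', by rw [hlen']; exact hplen, ?_⟩
  intro e e' he he'
  obtain ⟨e1, e2, e3, e4, _⟩ := oneB_bounds land n m e he
  obtain ⟨f1, f2, f3, f4, _⟩ := oneB_bounds land n m e' he'
  obtain ⟨hee0, heel⟩ := encC_bounds n m e e1 e2 e3 e4
  obtain ⟨hef0, hefl⟩ := encC_bounds n m e' f1 f2 f3 f4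
  rw [hiff' (encC m e) (encC m e') hee0 (by omega) hef0 (by omega)]
  rw [hiff e e' he he', hiff e a he ha, hiff e' b he' hb, hiff e b he hb, hiff e' a he' ha]
  rw [eqvGen_add_edge]
  constructor
  · rintro (h | ⟨h1, h2⟩ | ⟨h1, h2⟩)
    · exact Or.inl h
    · exact Or.inr (Or.inl ⟨h1, Relation.EqvGen.symm _ _ h2⟩)
    · exact Or.inr (Or.inr ⟨h1, Relation.EqvGen.symm _ _ h2⟩)
  · rintro (h | ⟨h1, h2⟩ | ⟨h1, h2⟩)
    · exact Or.inl h
    · exact Or.inr (Or.inl ⟨h1, Relation.EqvGen.symm _ _ h2⟩)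
    · exact Or.inr (Or.inr ⟨h1, Relation.EqvGen.symm _ _ h2⟩)

theorem opt_union (land : List (List Int)) (n m : Int) (rr : Int × Int → Int × Int → Prop)
    (p : List Int) (hwf : UFWF p) (hplen : ((p.length : Nat) : Int) = n * m)
    (hiff : ∀ e e', oneB land n m e = true → oneB land n m e' = true →
      (rootP p (encC m e) = rootP p (encC m e') ↔ Relation.EqvGen rr e e'))
    (cond : Prop) [Decidable cond]
    (a b : Int × Int) (ha : oneB land n m a = true) (hcond : cond ↔ oneB land n m b = true)
    (x y : Int) (hx : x = encC m a) (hy : y = encC m b) :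
    UFWF (if cond then ufUnion p x y else p) ∧
    ((((if cond then ufUnion p x y else p).length : Nat) : Int) = n * m) ∧
    ∀ e e', oneB land n m e = true → oneB land n m e' = true →
      (rootP (if cond then ufUnion p x y else p) (encC m e)
          = rootP (if cond then ufUnion p x y else p) (encC m e') ↔
        Relation.EqvGen (fun u v => rr u v ∨
          (u = a ∧ v = b ∧ oneB land n m b = true)) e e') := by
  by_cases hcd : cond
  · simp only [if_pos hcd]
    subst hx hy
    have hb := hcond.mp hcd
    obtain ⟨w1, w2, w3⟩ := union_step land n m rr p hwf hplen hiff a b ha hb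
    refine ⟨w1, w2, ?_⟩
    intro e e' he he'
    rw [w3 e e' he he']
    apply eqvGen_congr
    intro u v
    constructor
    · rintro (hr | ⟨hu, hv⟩)
      · exact Or.inl hr
      · exact Or.inr ⟨hu, hv, hb⟩
    · rintro (hr | ⟨hu, hv, _⟩)
      · exact Or.inl hr
      · exact Or.inr ⟨hu, hv⟩
  · simp only [if_neg hcd]
    refine ⟨hwf, hplen, ?_⟩
    intro e e' he he'
    rw [hiff e e' he he']
    apply eqvGen_congr
    intro u v
    constructor
    · exact Or.inl
    · rintro (hr | ⟨hu, hv, hob⟩)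
      · exact hr
      · exact absurd hob (fun hh => hcd (hcond.mpr hh))

-- B's union-pass loop body
def stepUF (land : List (List Int)) (n m : Int) (p : List Int) (c : Int × Int) : List Int :=
  if mget land c.1 c.2 0 = 1 then
    let p' := if c.2 + 1 < m ∧ mget land c.1 (c.2 + 1) 0 = 1
      then ufUnion p (c.1 * m + c.2) (c.1 * m + c.2 + 1) else p
    if c.1 + 1 < n ∧ mget land (c.1 + 1) c.2 0 = 1
      then ufUnion p' (c.1 * m + c.2) ((c.1 + 1) * m + c.2) else p'
  else p

theorem stepUF_inv (land : List (List Int)) (n m : Int) (done : List (Int × Int))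
    (c : Int × Int) (hc : c ∈ allCells n m) (p : List Int)
    (h : IB land n m done p) : IB land n m (done ++ [c]) (stepUF land n m p c) := by
  obtain ⟨i, j⟩ := c
  obtain ⟨hi0, hin, hj0, hjm⟩ := (mem_allCells n m (i, j)).mp hc
  simp only at hi0 hin hj0 hjm
  obtain ⟨hwf, hplen, hiff⟩ := h
  unfold stepUF
  dsimp only
  by_cases hoil : mget land i j 0 = 1
  · rw [if_pos hoil]
    have honec : oneB land n m (i, j) = true := by
      unfold oneB
      exact decide_eq_true ⟨hi0, hin, hj0, hjm, hoil⟩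
    have hrt : (j + 1 < m ∧ mget land i (j + 1) 0 = 1) ↔
        oneB land n m (i, j + 1) = true := by
      unfold oneB
      simp only [decide_eq_true_eq]
      constructor
      · rintro ⟨h4, h5⟩
        exact ⟨hi0, hin, by omega, h4, h5⟩
      · rintro ⟨_, _, _, h4, h5⟩
        exact ⟨h4, h5⟩
    have hdn : (i + 1 < n ∧ mget land (i + 1) j 0 = 1) ↔
        oneB land n m (i + 1, j) = true := by
      unfold oneB
      simp only [decide_eq_true_eq]
      constructor
      · rintro ⟨h2, h5⟩
        exact ⟨by omega, h2, hj0, hjm, h5⟩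
      · rintro ⟨_, h2, _, _, h5⟩
        exact ⟨h2, h5⟩
    obtain ⟨hwf1, hlen1, hiff1⟩ := opt_union land n m
      (rdEdge land n m (fun u => u ∈ done)) p hwf hplen hiff
      (j + 1 < m ∧ mget land i (j + 1) 0 = 1) (i, j) (i, j + 1) honec hrt
      (i * m + j) (i * m + j + 1) rfl (by unfold encC; ring)
    obtain ⟨hwf2, hlen2, hiff2⟩ := opt_union land n m _ _ hwf1 hlen1 hiff1
      (i + 1 < n ∧ mget land (i + 1) j 0 = 1) (i, j) (i + 1, j) honec hdn
      (i * m + j) ((i + 1) * m + j) rfl rfl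
    refine ⟨hwf2, hlen2, ?_⟩
    intro e e' he he'
    rw [hiff2 e e' he he']
    apply eqvGen_congr
    intro u v
    constructor
    · rintro ((⟨hu, h2, h3, h4⟩ | ⟨hu, hv, hob⟩) | ⟨hu, hv, hob⟩)
      · exact ⟨List.mem_append_left _ hu, h2, h3, h4⟩
      · subst hu
        subst hv
        exact ⟨List.mem_append_right _ (List.mem_singleton.mpr rfl), honec, hob, Or.inl rfl⟩
      · subst hu
        subst hv
        exact ⟨List.mem_append_right _ (List.mem_singleton.mpr rfl), honec, hob, Or.inr rfl⟩
    · rintro ⟨hu, h2, h3, h4⟩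
      rcases List.mem_append.mp hu with hmem | hmem
      · exact Or.inl (Or.inl ⟨hmem, h2, h3, h4⟩)
      · rw [List.mem_singleton] at hmem
        subst hmem
        rcases h4 with rfl | rfl
        · exact Or.inl (Or.inr ⟨rfl, rfl, h3⟩)
        · exact Or.inr ⟨rfl, rfl, h3⟩
  · rw [if_neg hoil]
    refine ⟨hwf, hplen, ?_⟩
    intro e e' he he'
    rw [hiff e e' he he']
    apply eqvGen_congr
    intro u v
    constructor
    · rintro ⟨hu, h2, h3, h4⟩
      exact ⟨List.mem_append_left _ hu, h2, h3, h4⟩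
    · rintro ⟨hu, h2, h3, h4⟩
      rcases List.mem_append.mp hu with hmem | hmem
      · exact ⟨hmem, h2, h3, h4⟩
      · rw [List.mem_singleton] at hmem
        subst hmem
        exact absurd ((oneB_bounds land n m _ h2).2.2.2.2) hoil

theorem IB_init (land : List (List Int)) (n m : Int) (hn : 0 ≤ n) (hm : 0 ≤ m) :
    IB land n m [] (PySem.List.pyRange 0 (n * m) 1) := by
  obtain ⟨hwf, hlen, hroot⟩ := uf_init (n * m) (mul_nonneg hn hm)
  refine ⟨hwf, hlen, ?_⟩
  intro e e' he he'
  obtain ⟨e1, e2, e3, e4, _⟩ := oneB_bounds land n m e he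
  obtain ⟨f1, f2, f3, f4, _⟩ := oneB_bounds land n m e' he'
  obtain ⟨g1, g2⟩ := encC_bounds n m e e1 e2 e3 e4
  obtain ⟨g3, g4⟩ := encC_bounds n m e' f1 f2 f3 f4
  rw [hroot (encC m e) g1 g2, hroot (encC m e') g3 g4]
  constructor
  · intro hh
    rw [encC_inj m e e' e3 e4 f3 f4 hh]
    exact Relation.EqvGen.refl _
  · intro hh
    have hfalse : ∀ u v : Int × Int,
        rdEdge land n m (fun u => u ∈ ([] : List (Int × Int))) u v ↔ False := by
      intro u v
      constructor
      · intro hr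
        exact absurd hr.1 List.not_mem_nil
      · exact False.elim
    have := (eqvGen_congr hfalse e e').mp hh
    rw [(eqvGen_false_iff e e').mp this]

theorem eqvGen_full_iff_reach (land : List (List Int)) (n m : Int) (e e' : Int × Int) :
    Relation.EqvGen (rdEdge land n m (fun u => u ∈ allCells n m)) e e'
      ↔ ReachP land n m e e' := by
  constructor
  · intro h
    induction h with
    | rel u v huv =>
      obtain ⟨_, h2, h3, h4⟩ := huv
      obtain ⟨ux, uy⟩ := u
      refine Relation.ReflTransGen.single ⟨h2, h3, ?_⟩
      rcases h4 with rfl | rfl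
      · dsimp only
        omega
      · dsimp only
        omega
    | refl => exact Relation.ReflTransGen.refl
    | symm _ _ _ ih => exact reach_symm land n m ih
    | trans _ _ _ _ _ ih1 ih2 => exact ih1.trans ih2
  · intro h
    induction h with
    | refl => exact Relation.EqvGen.refl _
    | @tail b c hab hbc ih =>
      refine Relation.EqvGen.trans _ _ _ ih ?_
      obtain ⟨bx, by2⟩ := b
      obtain ⟨cx, cy⟩ := c
      obtain ⟨hob, hoc, hdist⟩ := hbc
      obtain ⟨bb1, bb2, bb3, bb4, _⟩ := oneB_bounds land n m _ hob
      obtain ⟨cc1, cc2, cc3, cc4, _⟩ := oneB_bounds land n m _ hoc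
      simp only at hdist bb1 bb2 bb3 bb4 cc1 cc2 cc3 cc4
      have h4 : (cx = bx ∧ cy = by2 + 1) ∨ (bx = cx ∧ by2 = cy + 1) ∨
          (cy = by2 ∧ cx = bx + 1) ∨ (by2 = cy ∧ bx = cx + 1) := by
        omega
      rcases h4 with ⟨hA, hB⟩ | ⟨hA, hB⟩ | ⟨hA, hB⟩ | ⟨hA, hB⟩
      · exact Relation.EqvGen.rel _ _
          ⟨(mem_allCells n m (bx, by2)).mpr ⟨bb1, bb2, bb3, bb4⟩, hob, hoc,
            Or.inl (Prod.ext hA hB)⟩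
      · exact Relation.EqvGen.symm _ _ (Relation.EqvGen.rel _ _
          ⟨(mem_allCells n m (cx, cy)).mpr ⟨cc1, cc2, cc3, cc4⟩, hoc, hob,
            Or.inl (Prod.ext hA hB)⟩)
      · exact Relation.EqvGen.rel _ _
          ⟨(mem_allCells n m (bx, by2)).mpr ⟨bb1, bb2, bb3, bb4⟩, hob, hoc,
            Or.inr (Prod.ext hB hA)⟩
      · exact Relation.EqvGen.symm _ _ (Relation.EqvGen.rel _ _
          ⟨(mem_allCells n m (cx, cy)).mpr ⟨cc1, cc2, cc3, cc4⟩, hoc, hob,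
            Or.inr (Prod.ext hB hA)⟩)



-- ---------- B's collection pass ----------

def stepCol (land : List (List Int)) (n m : Int) (p1 : List Int)
    (st : List Int × List (PySem.Set Int)) (c : Int × Int) : List Int × List (PySem.Set Int) :=
  if mget land c.1 c.2 0 = 1 then
    (st.1 ++ [ufFind p1 p1.length (c.1 * m + c.2)],
     PySem.List.pySetD st.2 c.2
       (PySem.Set.add (PySem.List.pyGetD st.2 c.2 PySem.Set.empty)
         (ufFind p1 p1.length (c.1 * m + c.2))))
  else st

def PC (land : List (List Int)) (n m : Int) (p1 : List Int) (done : List (Int × Int))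
    (st : List Int × List (PySem.Set Int)) : Prop :=
  st.1 = (done.filter (fun e => oneB land n m e)).map (fun e => rootP p1 (encC m e)) ∧
  st.2.length = m.toNat ∧
  ∀ k : Nat, k < m.toNat → ∀ z : Int,
    (z ∈ st.2.getD k PySem.Set.empty ↔
      ∃ e ∈ done, oneB land n m e = true ∧ e.2 = (k : Int) ∧ rootP p1 (encC m e) = z)

theorem stepCol_inv (land : List (List Int)) (n m : Int) (p1 : List Int)
    (done : List (Int × Int)) (c : Int × Int) (hc : c ∈ allCells n m)
    (st : List Int × List (PySem.Set Int)) (h : PC land n m p1 done st) :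
    PC land n m p1 (done ++ [c]) (stepCol land n m p1 st c) := by
  obtain ⟨i, j⟩ := c
  obtain ⟨hi0, hin, hj0, hjm⟩ := (mem_allCells n m (i, j)).mp hc
  simp only at hi0 hin hj0 hjm
  obtain ⟨h1, h2, h3⟩ := h
  unfold stepCol
  dsimp only
  by_cases hoil : mget land i j 0 = 1
  · rw [if_pos hoil]
    have hone : oneB land n m (i, j) = true := by
      unfold oneB
      exact decide_eq_true ⟨hi0, hin, hj0, hjm, hoil⟩
    refine ⟨?_, ?_, ?_⟩
    · rw [List.filter_append, List.map_append, ← h1]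
      have hfilt : List.filter (fun e => oneB land n m e) [((i : Int), (j : Int))]
          = [(i, j)] := by
        simp [hone]
      rw [hfilt]
      rfl
    · rw [PySem.List.pySetD_of_nonneg _ _ hj0, List.length_set]
      exact h2
    · intro k hk z
      rw [PySem.List.pySetD_of_nonneg _ _ hj0]
      have hjl : j.toNat < st.2.length := by omega
      by_cases hkj : k = j.toNat
      · subst hkj
        rw [getD_set_self' _ _ _ _ hjl]
        have hg : PySem.List.pyGetD st.2 j PySem.Set.empty
            = st.2.getD j.toNat PySem.Set.empty := by
          rw [PySem.List.pyGetD_eq_getElem st.2 PySem.Set.empty hj0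
              (by first | omega | simp only [PySem.List.len_eq]; omega),
            List.getD_eq_getElem st.2 _ hjl]
        rw [PySem.Set.mem_add, hg, h3 j.toNat (by omega) z]
        constructor
        · rintro (⟨e, he, hoe, hcol, hr⟩ | rfl)
          · exact ⟨e, List.mem_append_left _ he, hoe, hcol, hr⟩
          · refine ⟨(i, j), List.mem_append_right _ (List.mem_singleton.mpr rfl), hone, ?_, rfl⟩
            simp only
            omega
        · rintro ⟨e, he, hoe, hcol, hr⟩
          rcases List.mem_append.mp he with hmem | hmem
          · exact Or.inl ⟨e, hmem, hoe, hcol, hr⟩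
          · rw [List.mem_singleton] at hmem
            subst hmem
            exact Or.inr hr.symm
      · rw [getD_set_ne' _ _ _ _ _ hkj, h3 k hk z]
        constructor
        · rintro ⟨e, he, hoe, hcol, hr⟩
          exact ⟨e, List.mem_append_left _ he, hoe, hcol, hr⟩
        · rintro ⟨e, he, hoe, hcol, hr⟩
          rcases List.mem_append.mp he with hmem | hmem
          · exact ⟨e, hmem, hoe, hcol, hr⟩
          · rw [List.mem_singleton] at hmem
            subst hmem
            simp only at hcol
            omega
  · rw [if_neg hoil]
    have honeF : oneB land n m (i, j) = false := by
      rw [Bool.eq_false_iff]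
      intro hx
      exact hoil (oneB_bounds land n m _ hx).2.2.2.2
    refine ⟨?_, h2, ?_⟩
    · rw [List.filter_append, h1]
      have hfilt : List.filter (fun e => oneB land n m e) [((i : Int), (j : Int))] = [] := by
        simp [honeF]
      rw [hfilt, List.append_nil]
    · intro k hk z
      rw [h3 k hk z]
      constructor
      · rintro ⟨e, he, hoe, hcol, hr⟩
        exact ⟨e, List.mem_append_left _ he, hoe, hcol, hr⟩
      · rintro ⟨e, he, hoe, hcol, hr⟩
        rcases List.mem_append.mp he with hmem | hmem
        · exact ⟨e, hmem, hoe, hcol, hr⟩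
        · rw [List.mem_singleton] at hmem
          subst hmem
          rw [honeF] at hoe
          exact absurd hoe (by simp)

theorem PC_init (land : List (List Int)) (n m : Int) (p1 : List Int) :
    PC land n m p1 [] (([] : List Int),
      (PySem.List.pyRange 0 m 1).map (fun _ => (PySem.Set.empty : PySem.Set Int))) := by
  refine ⟨rfl, ?_, ?_⟩
  · simp only [List.length_map]
    rw [PySem.List.length_pyRange_one]
    norm_num
  · intro k hk z
    rw [getD_map_const _ _ _ _ (by rw [PySem.List.length_pyRange_one]; omega)]
    constructor
    · intro hz
      exact absurd hz List.not_mem_nil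
    · rintro ⟨e, he, _⟩
      exact absurd he List.not_mem_nil

-- ---------- counting: the B answer entries are SpecCnt ----------

theorem nodup_allCells (n m : Int) : (allCells n m).Nodup := by
  unfold allCells
  have hmain : ∀ L : List Int, L.Nodup →
      (L.flatMap (fun i => (PySem.List.pyRange 0 m 1).map (fun j => ((i : Int), j)))).Nodup := by
    intro L
    induction L with
    | nil => intro _; simp
    | cons a t ih =>
      intro hnd
      rw [List.flatMap_cons, List.nodup_append]
      refine ⟨?_, ih (List.nodup_cons.mp hnd).2, ?_⟩
      · exact List.Nodup.map (fun x y hxy => (Prod.ext_iff.mp hxy).2)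
          (PySem.List.nodup_pyRange_one 0 m)
      · intro x hx y hy
        obtain ⟨j, hj, hxeq⟩ := List.mem_map.mp hx
        obtain ⟨i', hi', hmem⟩ := List.mem_flatMap.mp hy
        obtain ⟨j', hj', hpair⟩ := List.mem_map.mp hmem
        intro heq
        have h12 : ((a : Int), (j : Int)) = (i', j') := hxeq.trans (heq.trans hpair.symm)
        have haeq : a = i' := (Prod.ext_iff.mp h12).1
        exact (List.nodup_cons.mp hnd).1 (haeq ▸ hi')
  exact hmain _ (PySem.List.nodup_pyRange_one 0 n)

theorem card_filter_toFinset {α : Type} [DecidableEq α] :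
    ∀ (l : List α), l.Nodup → ∀ (p : α → Bool),
    (l.toFinset.filter (fun a => p a = true)).card = l.countP p := by
  intro l
  induction l with
  | nil => intro _ p; simp
  | cons a t ih =>
    intro hnd p
    have hat : a ∉ t := (List.nodup_cons.mp hnd).1
    rw [List.toFinset_cons, Finset.filter_insert, List.countP_cons]
    by_cases hp : p a = true
    · rw [if_pos hp, Finset.card_insert_of_notMem
        (fun hmem => hat (List.mem_toFinset.mp (Finset.mem_of_mem_filter a hmem))),
        ih (List.nodup_cons.mp hnd).2 p, if_pos hp]
    · rw [if_neg hp, ih (List.nodup_cons.mp hnd).2 p, if_neg hp]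
      omega

noncomputable def touchB (land : List (List Int)) (n m c : Int) (e : Int × Int) : Bool :=
  @decide (oneB land n m e = true ∧ touchC land n m e c) (Classical.propDecidable _)

theorem touchB_iff (land : List (List Int)) (n m c : Int) (e : Int × Int) :
    touchB land n m c e = true ↔ (oneB land n m e = true ∧ touchC land n m e c) := by
  unfold touchB
  exact ⟨fun h => @of_decide_eq_true _ (Classical.propDecidable _) h,
    fun h => @decide_eq_true _ (Classical.propDecidable _) h⟩

theorem SpecCnt_eq_countP (land : List (List Int)) (n m c : Int) :
    SpecCnt land n m c = (allCells n m).countP (touchB land n m c) := by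
  unfold SpecCnt
  rw [← card_filter_toFinset (allCells n m) (nodup_allCells n m) (touchB land n m c)]
  congr 1
  ext e
  constructor
  · intro h
    obtain ⟨hg, ht⟩ := (@Finset.mem_filter _ _ (Classical.decPred _) _ _).mp h
    have hone := (mem_gridOnes land n m e).mp hg
    obtain ⟨q1, q2, q3, q4, _⟩ := oneB_bounds land n m e hone
    exact Finset.mem_filter.mpr
      ⟨List.mem_toFinset.mpr ((mem_allCells n m e).mpr ⟨q1, q2, q3, q4⟩),
       (touchB_iff land n m c e).mpr ⟨hone, ht⟩⟩
  · intro h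
    obtain ⟨hm', hd⟩ := Finset.mem_filter.mp h
    obtain ⟨h1', h2'⟩ := (touchB_iff land n m c e).mp hd
    exact (@Finset.mem_filter _ _ (Classical.decPred _) _ _).mpr
      ⟨(mem_gridOnes land n m e).mpr h1', h2'⟩

theorem B_count (land : List (List Int)) (n m : Int) (p1 : List Int)
    (hiffR : ∀ e e', oneB land n m e = true → oneB land n m e' = true →
      (rootP p1 (encC m e) = rootP p1 (encC m e') ↔ ReachP land n m e e'))
    (rv : List Int) (cr : List (PySem.Set Int))
    (hrv : rv = ((allCells n m).filter (fun e => oneB land n m e)).map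
      (fun e => rootP p1 (encC m e)))
    (hcrl : cr.length = m.toNat)
    (hcr : ∀ k : Nat, k < m.toNat → ∀ z : Int,
      (z ∈ cr.getD k PySem.Set.empty ↔ ∃ e ∈ allCells n m,
        oneB land n m e = true ∧ e.2 = (k : Int) ∧ rootP p1 (encC m e) = z)) :
    (PySem.List.pyRange 0 m 1).map (fun c => ((rv.map (fun r =>
        if PySem.Set.contains (PySem.List.pyGetD cr c PySem.Set.empty) r
        then (1 : Int) else 0)).sum))
      = specAns land n m := by
  unfold specAns
  apply List.map_congr_left
  intro c hcm
  obtain ⟨hc0, hcm'⟩ := PySem.List.mem_pyRange_one.mp hcm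
  have hcl : c.toNat < m.toNat := by omega
  have hgc : PySem.List.pyGetD cr c PySem.Set.empty = cr.getD c.toNat PySem.Set.empty := by
    rw [PySem.List.pyGetD_eq_getElem cr PySem.Set.empty hc0
        (by first | omega | simp only [PySem.List.len_eq]; omega),
      List.getD_eq_getElem cr _ (by omega)]
  rw [hgc, hrv, PySem.List.sum_map_ite_one_zero, List.countP_map, List.countP_filter]
  congr 1
  rw [SpecCnt_eq_countP land n m c]
  apply List.countP_congr
  intro e he
  obtain ⟨e1, e2, e3, e4⟩ := (mem_allCells n m e).mp he
  by_cases hoe : oneB land n m e = true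
  · have hmain : (PySem.Set.contains (cr.getD c.toNat PySem.Set.empty)
        (rootP p1 (encC m e)) = true) ↔ touchC land n m e c := by
      rw [PySem.Set.contains_iff, hcr c.toNat hcl (rootP p1 (encC m e))]
      constructor
      · rintro ⟨e', he', hoe', hcol, hr⟩
        refine ⟨e', (mem_compF land n m e e').mpr
          ⟨hoe', reach_symm land n m ((hiffR e' e hoe' hoe).mp hr)⟩, by omega⟩
      · rintro ⟨d, hd, hdc⟩
        obtain ⟨hod, hrd⟩ := (mem_compF land n m e d).mp hd
        obtain ⟨d1, d2, d3, d4, _⟩ := oneB_bounds land n m d hod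
        exact ⟨d, (mem_allCells n m d).mpr ⟨d1, d2, d3, d4⟩, hod, by omega,
          (hiffR d e hod hoe).mpr (reach_symm land n m hrd)⟩
    by_cases hq : PySem.Set.contains (cr.getD c.toNat PySem.Set.empty)
        (rootP p1 (encC m e)) = true
    · simp only [Function.comp_apply]
      exact iff_of_true (by rw [hq, hoe]; rfl)
        ((touchB_iff land n m c e).mpr ⟨hoe, hmain.mp hq⟩)
    · have hq' : PySem.Set.contains (cr.getD c.toNat PySem.Set.empty)
          (rootP p1 (encC m e)) = false := Bool.eq_false_iff.mpr hq
      simp only [Function.comp_apply]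
      refine iff_of_false (by rw [hq', Bool.false_and]; exact Bool.false_ne_true) ?_
      intro hcon
      exact hq (hmain.mpr ((touchB_iff land n m c e).mp hcon).2)
  · have hoe' : oneB land n m e = false := Bool.eq_false_iff.mpr hoe
    simp only [Function.comp_apply]
    refine iff_of_false (by rw [hoe', Bool.and_false]; exact Bool.false_ne_true) ?_
    intro hcon
    exact hoe ((touchB_iff land n m c e).mp hcon).1

-- ---------- B: the port equals the explicit cells-fold formulation ----------

def solutionAltCells (land : List (List Int)) : Int :=
  let n : Int := PySem.List.len land
  let m : Int := PySem.List.len (PySem.List.pyGetD land 0 [])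
  let p1 := (allCells n m).foldl (stepUF land n m) (PySem.List.pyRange 0 (n * m) 1)
  let fin := (allCells n m).foldl (stepCol land n m p1)
    (([] : List Int), (PySem.List.pyRange 0 m 1).map (fun _ => (PySem.Set.empty : PySem.Set Int)))
  let ans := (PySem.List.pyRange 0 m 1).map (fun c => ((fin.1.map (fun r =>
    if PySem.Set.contains (PySem.List.pyGetD fin.2 c PySem.Set.empty) r
    then (1 : Int) else 0)).sum))
  (PySem.List.max? ans (fun z => z)).getD 0

theorem alt_eq_cells (land : List (List Int)) : solution_alt land = solutionAltCells land := by
  unfold solution_alt solutionAltCells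
  dsimp only
  rw [← nested_fold_eq_cells (F := stepUF land (PySem.List.len land)
      (PySem.List.len (PySem.List.pyGetD land 0 [])))]
  rw [← nested_fold_eq_cells (n := PySem.List.len land)
      (m := PySem.List.len (PySem.List.pyGetD land 0 []))
      (init := (([] : List Int), (PySem.List.pyRange 0
        (PySem.List.len (PySem.List.pyGetD land 0 [])) 1).map
        (fun _ => (PySem.Set.empty : PySem.Set Int))))]
  rfl

theorem solution_alt_eq_spec (land : List (List Int)) :
    solution_alt land = (PySem.List.max? (specAns land (PySem.List.len land)
        (PySem.List.len (PySem.List.pyGetD land 0 []))) (fun z => z)).getD 0 := by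
  rw [alt_eq_cells]
  unfold solutionAltCells
  dsimp only
  have hn : (0 : Int) ≤ PySem.List.len land := by
    rw [PySem.List.len_eq]
    positivity
  have hm : (0 : Int) ≤ PySem.List.len (PySem.List.pyGetD land 0 []) := by
    rw [PySem.List.len_eq]
    positivity
  refine congrArg (fun t => (PySem.List.max? t (fun z => z)).getD 0) ?_
  obtain ⟨hwfU, hlenU, hiffU⟩ := fold_pref
    (stepUF land (PySem.List.len land) (PySem.List.len (PySem.List.pyGetD land 0 [])))
    (fun a => a ∈ allCells (PySem.List.len land) (PySem.List.len (PySem.List.pyGetD land 0 [])))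
    (IB land (PySem.List.len land) (PySem.List.len (PySem.List.pyGetD land 0 [])))
    (fun done a st hQ hP => stepUF_inv land _ _ done a hQ st hP)
    (allCells (PySem.List.len land) (PySem.List.len (PySem.List.pyGetD land 0 []))) []
    (PySem.List.pyRange 0 (PySem.List.len land * PySem.List.len (PySem.List.pyGetD land 0 [])) 1)
    (fun a ha => ha) (IB_init land _ _ hn hm)
  obtain ⟨hrv, hcrl, hcr⟩ := fold_pref
    (stepCol land (PySem.List.len land) (PySem.List.len (PySem.List.pyGetD land 0 []))
      ((allCells (PySem.List.len land) (PySem.List.len (PySem.List.pyGetD land 0 []))).foldl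
        (stepUF land (PySem.List.len land) (PySem.List.len (PySem.List.pyGetD land 0 [])))
        (PySem.List.pyRange 0
          (PySem.List.len land * PySem.List.len (PySem.List.pyGetD land 0 [])) 1)))
    (fun a => a ∈ allCells (PySem.List.len land) (PySem.List.len (PySem.List.pyGetD land 0 [])))
    (PC land (PySem.List.len land) (PySem.List.len (PySem.List.pyGetD land 0 []))
      ((allCells (PySem.List.len land) (PySem.List.len (PySem.List.pyGetD land 0 []))).foldl
        (stepUF land (PySem.List.len land) (PySem.List.len (PySem.List.pyGetD land 0 [])))
        (PySem.List.pyRange 0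
          (PySem.List.len land * PySem.List.len (PySem.List.pyGetD land 0 [])) 1)))
    (fun done a st hQ hP => stepCol_inv land _ _ _ done a hQ st hP)
    (allCells (PySem.List.len land) (PySem.List.len (PySem.List.pyGetD land 0 []))) []
    (([] : List Int), (PySem.List.pyRange 0
      (PySem.List.len (PySem.List.pyGetD land 0 [])) 1).map
      (fun _ => (PySem.Set.empty : PySem.Set Int)))
    (fun a ha => ha) (PC_init land _ _ _)
  exact B_count land _ _ _
    (fun e e' he he' => (hiffU e e' he he').trans (eqvGen_full_iff_reach land _ _ e e'))
    _ _ hrv hcrl hcr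


-- ===== VERDICT (by name: the statement is the Claim_ definition above) =====
theorem solution_spec : Claim_equal_solution := by
  unfold Claim_equal_solution Spec_solution
  intro land _ _
  rw [solution_eq_spec land, solution_alt_eq_spec land]
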